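-- pv_equiv track=rewrite | github.com/voidful/Phraseg | phraseg/main.py | _get_superlap
-- ===== SOURCE A (Python) =====
-- from collections import defaultdict
--
-- def _get_superlap(words_list, sentence, ngrams):
--     superlap_list = defaultdict(list)
--     for word in words_list:
--         if len(word) < 2:
--             continue
--         superlap_list[word] = {'left': [], "right": []}
--         word_index = sentence.find(word)
--         if word_index >= 0:
--             for right_index in range(1, len(sentence) - word_index):
--                 right = sentence[word_index:word_index + len(word) + right_index]
--                 if len(right) > 1 and " " not in right and word not in superlap_list[word][
--                     "right"] and right != word and right in ngrams and ngrams[right] > 0: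
--                     superlap_list[word]["right"].append(right)
--             for left_index in range(1, word_index):
--                 left = sentence[word_index - left_index:word_index + len(word)]
--                 if len(left) > 1 and " " not in left and word not in superlap_list[word][
--                     "left"] and left != word and left in ngrams and ngrams[left] > 0:
--                     superlap_list[word]["left"].append(left)
--     return superlap_list
-- ===== SOURCE B (Python) =====
-- def _get_superlap(words_list, sentence, ngrams):
--     # tokenize the sentence once into (start, end) spans of maximal space-free runs
--     spans = []
--     start = None
--     for pos, ch in enumerate(sentence + ' '):
--         if ch == ' ':
--             if start is not None:
--                 spans.append((start, pos))
--                 start = None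
--         elif start is None:
--             start = pos
--     result = {}
--     for word in words_list:
--         if len(word) < 2:
--             continue
--         lefts, rights = [], []
--         wi = sentence.find(word)
--         if wi >= 0:
--             we = wi + len(word)
--             span = next(((s, e) for s, e in spans if s <= wi and we <= e), None)
--             if span is not None:
--                 s, e = span
--                 rights = [sentence[wi:j] for j in range(we + 1, e + 1)
--                           if sentence[wi:j] in ngrams and ngrams[sentence[wi:j]] > 0]
--                 lefts = [sentence[i:we] for i in reversed(range(s, wi))
--                          if sentence[i:we] in ngrams and ngrams[sentence[i:we]] > 0]
--         result[word] = {'left': lefts, 'right': rights}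
--     return result
-- ===== Notes on version B (the rewrite author's own statement) =====
-- stated objective: alternative
-- what changed: A rescans the whole remainder of the sentence for every word, filtering each candidate slice for spaces plus a dead 'word not in list' membership test; B tokenizes the sentence once into (start,end) spans of maximal space-free runs, looks up the span enclosing each word's first occurrence, and enumerates candidate slices only inside that span, so the per-candidate space/length/inequality filters disappear.
-- intended difference: On words of length >= 2 whose space-free token touches a sentence edge with the edge-reaching candidate being a positively-counted ngram, A's off-by-one loop bounds append the clamped end-of-sentence tail len(word)-1 extra times on the right and never consider the left extension starting at index 0, while B lists each such candidate exactly once, which is the intended value. — e.g. on _get_superlap(["ab"], "zabc", [("abc", 1)]): A returns [("ab", [("left", []), ("right", ["abc", "abc"])])], B returns [("ab", [("left", []), ("right", ["abc"])])]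
import Mathlib
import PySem

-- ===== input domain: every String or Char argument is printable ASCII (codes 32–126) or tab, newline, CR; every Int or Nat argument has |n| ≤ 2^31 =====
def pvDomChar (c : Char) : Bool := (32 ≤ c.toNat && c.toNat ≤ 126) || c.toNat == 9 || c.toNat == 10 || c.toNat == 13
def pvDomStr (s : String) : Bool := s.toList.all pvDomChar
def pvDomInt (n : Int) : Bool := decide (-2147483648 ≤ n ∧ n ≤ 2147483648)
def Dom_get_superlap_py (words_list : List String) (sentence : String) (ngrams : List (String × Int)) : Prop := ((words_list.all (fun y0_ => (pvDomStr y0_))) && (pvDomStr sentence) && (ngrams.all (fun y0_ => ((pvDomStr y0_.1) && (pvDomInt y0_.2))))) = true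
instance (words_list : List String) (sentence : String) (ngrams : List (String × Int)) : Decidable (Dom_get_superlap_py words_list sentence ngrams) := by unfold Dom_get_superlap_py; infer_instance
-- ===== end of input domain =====

-- B tokenizes the sentence once into spans of maximal space-free runs and enumerates candidates
-- inside the enclosing span only; on the edge corners described at D_ below B returns the intended value.

-- ===== PORT A =====
-- 'g in ngrams and ngrams[g] > 0' (dict membership + first-match lookup), shared by both sources verbatim
def gsNgOk (ngrams : List (String × Int)) (g : String) : Bool :=
  ngrams.any (fun p => p.1 == g) && decide (0 < (ngrams.lookup g).getD 0)

def gsRightStep (sentence word : String) (ngrams : List (String × Int)) (wi : Int) (acc : List String) (ri : Int) : List String :=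
  let right := PySem.Str.slice sentence (some wi) (some (wi + PySem.Str.len word + ri))
  if (decide (1 < PySem.Str.len right) && !(PySem.Str.isIn " " right)) && !(acc.contains word) && (right != word && gsNgOk ngrams right)
  then acc ++ [right] else acc

def gsLeftStep (sentence word : String) (ngrams : List (String × Int)) (wi : Int) (acc : List String) (li : Int) : List String :=
  let left := PySem.Str.slice sentence (some (wi - li)) (some (wi + PySem.Str.len word))
  if (decide (1 < PySem.Str.len left) && !(PySem.Str.isIn " " left)) && !(acc.contains word) && (left != word && gsNgOk ngrams left)
  then acc ++ [left] else acc

def gsWordStep (sentence : String) (ngrams : List (String × Int)) (d : PySem.Dict String (List (String × List String))) (word : String) : PySem.Dict String (List (String × List String)) :=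
  if PySem.Str.len word < 2 then d
  else
    let d1 := d.insert word [("left", []), ("right", [])]
    let wi := PySem.Str.find sentence word
    if 0 ≤ wi then
      let rights := (PySem.List.pyRange 1 (PySem.Str.len sentence - wi) 1).foldl (gsRightStep sentence word ngrams wi) []
      let lefts := (PySem.List.pyRange 1 wi 1).foldl (gsLeftStep sentence word ngrams wi) []
      d1.insert word [("left", lefts), ("right", rights)]
    else d1

def get_superlap_py (words_list : List String) (sentence : String) (ngrams : List (String × Int)) : List (String × List (String × List String)) :=
  (words_list.foldl (gsWordStep sentence ngrams) PySem.Dict.empty).items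

-- ===== PORT B =====
-- the tokenizing pass: fold over enumerate(sentence + ' ') carrying (spans so far, open run start)
def altSpanStep (st : List (Int × Int) × Option Int) (pc : Int × Char) : List (Int × Int) × Option Int :=
  if pc.2 == ' ' then
    match st.2 with
    | some s => (st.1 ++ [(s, pc.1)], none)
    | none => st
  else
    match st.2 with
    | none => (st.1, some pc.1)
    | some _ => st

def altSpans (sentence : String) : List (Int × Int) :=
  ((PySem.List.enumerate (sentence.toList ++ [' ']) 0).foldl altSpanStep ([], none)).1

def altWordEntry (sentence : String) (ngrams : List (String × Int)) (word : String) : List (String × List String) :=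
  let wi := PySem.Str.find sentence word
  if 0 ≤ wi then
    let we := wi + PySem.Str.len word
    match (altSpans sentence).find? (fun p => decide (p.1 ≤ wi) && decide (we ≤ p.2)) with
    | some (s, e) =>
      let rights := ((PySem.List.pyRange (we + 1) (e + 1) 1).filter
          (fun j => gsNgOk ngrams (PySem.Str.slice sentence (some wi) (some j)))).map
          (fun j => PySem.Str.slice sentence (some wi) (some j))
      let lefts := (((PySem.List.pyRange s wi 1).reverse).filter
          (fun i => gsNgOk ngrams (PySem.Str.slice sentence (some i) (some we)))).map
          (fun i => PySem.Str.slice sentence (some i) (some we))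
      [("left", lefts), ("right", rights)]
    | none => [("left", []), ("right", [])]
  else [("left", []), ("right", [])]

def get_superlap_py_alt (words_list : List String) (sentence : String) (ngrams : List (String × Int)) : List (String × List (String × List String)) :=
  (words_list.foldl (fun d word => if PySem.Str.len word < 2 then d else d.insert word (altWordEntry sentence ngrams word)) PySem.Dict.empty).items

-- ===== PRECONDITION & SPEC =====
-- On inputs where some word of length ≥ 2 has a space-free token touching a sentence edge whose
-- edge-reaching candidate is a positively-counted ngram, A's off-by-one loop bounds append the
-- clamped end-of-sentence tail len(word)-1 extra times on the right and never consider the left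
-- extension starting at index 0, while B lists each such candidate exactly once, which is the
-- intended value.
def D_get_superlap_py (words_list : List String) (sentence : String) (ngrams : List (String × Int)) : Prop :=
  ∃ word ∈ words_list, 2 ≤ PySem.Str.len word ∧ 0 ≤ PySem.Str.find sentence word ∧
    ((PySem.Str.find sentence word + PySem.Str.len word < PySem.Str.len sentence ∧
      PySem.Str.isIn " " (PySem.Str.slice sentence (some (PySem.Str.find sentence word)) none) = false ∧
      0 < (ngrams.lookup (PySem.Str.slice sentence (some (PySem.Str.find sentence word)) none)).getD 0)
    ∨ (1 ≤ PySem.Str.find sentence word ∧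
      PySem.Str.isIn " " (PySem.Str.slice sentence none (some (PySem.Str.find sentence word + PySem.Str.len word))) = false ∧
      0 < (ngrams.lookup (PySem.Str.slice sentence none (some (PySem.Str.find sentence word + PySem.Str.len word)))).getD 0))

instance (words_list : List String) (sentence : String) (ngrams : List (String × Int)) : Decidable (D_get_superlap_py words_list sentence ngrams) := by unfold D_get_superlap_py; infer_instance

def Spec_get_superlap_py (words_list : List String) (sentence : String) (ngrams : List (String × Int)) (out : List (String × List (String × List String))) : Prop := ¬ D_get_superlap_py words_list sentence ngrams → out = get_superlap_py_alt words_list sentence ngrams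
instance (words_list : List String) (sentence : String) (ngrams : List (String × Int)) (out : List (String × List (String × List String))) : Decidable (Spec_get_superlap_py words_list sentence ngrams out) := by unfold Spec_get_superlap_py; infer_instance

def pvDiffWitness_get_superlap_py : List String × String × (List (String × Int)) := (["ab"], "zabc", [("abc", 1)])
def pvDiffWitnessOut_get_superlap_py : (List (String × List (String × List String))) × (List (String × List (String × List String))) :=
  ([("ab", [("left", []), ("right", ["abc", "abc"])])], [("ab", [("left", []), ("right", ["abc"])])])

-- ===== CLAIM (what is proved, stated in full; the proofs are below) =====
def Claim_unchanged_get_superlap_py : Prop := ∀ (words_list : List String) (sentence : String) (ngrams : List (String × Int)), Dom_get_superlap_py words_list sentence ngrams → Spec_get_superlap_py words_list sentence ngrams (get_superlap_py words_list sentence ngrams)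
def Claim_exact_get_superlap_py : Prop := ∀ (words_list : List String) (sentence : String) (ngrams : List (String × Int)), Dom_get_superlap_py words_list sentence ngrams → D_get_superlap_py words_list sentence ngrams → get_superlap_py words_list sentence ngrams ≠ get_superlap_py_alt words_list sentence ngrams
def Claim_changed_get_superlap_py : Prop := Dom_get_superlap_py (pvDiffWitness_get_superlap_py.1) (pvDiffWitness_get_superlap_py.2.1) (pvDiffWitness_get_superlap_py.2.2) ∧ D_get_superlap_py (pvDiffWitness_get_superlap_py.1) (pvDiffWitness_get_superlap_py.2.1) (pvDiffWitness_get_superlap_py.2.2) ∧ get_superlap_py (pvDiffWitness_get_superlap_py.1) (pvDiffWitness_get_superlap_py.2.1) (pvDiffWitness_get_superlap_py.2.2) = pvDiffWitnessOut_get_superlap_py.1 ∧ get_superlap_py_alt (pvDiffWitness_get_superlap_py.1) (pvDiffWitness_get_superlap_py.2.1) (pvDiffWitness_get_superlap_py.2.2) = pvDiffWitnessOut_get_superlap_py.2 ∧ pvDiffWitnessOut_get_superlap_py.1 ≠ pvDiffWitnessOut_get_superlap_py.2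

-- ===== LEMMAS AND PROOFS =====

-- takeWhile: every position below its length satisfies the predicate
theorem pv_tw_get {p : Char → Bool} {u : List Char} {i : Nat}
    (h : i < (u.takeWhile p).length) : ∃ c, u[i]? = some c ∧ p c = true := by
  induction u generalizing i with
  | nil => simp [List.takeWhile] at h
  | cons a t ih =>
    by_cases hp : p a
    · cases i with
      | zero => exact ⟨a, by simp, hp⟩
      | succ i =>
        simp [List.takeWhile, hp] at h
        obtain ⟨c, hc, hpc⟩ := ih (by omega)
        exact ⟨c, by simpa using hc, hpc⟩
    · simp [List.takeWhile, hp] at h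

-- takeWhile: the first position at its length (if any) refutes the predicate
theorem pv_tw_stop {p : Char → Bool} {u : List Char}
    (h : (u.takeWhile p).length < u.length) :
    ∃ c, u[(u.takeWhile p).length]? = some c ∧ p c = false := by
  induction u with
  | nil => simp at h
  | cons a t ih =>
    by_cases hp : p a
    · simp only [List.takeWhile, hp, List.length_cons] at h ⊢
      obtain ⟨c, hc, hpc⟩ := ih (by simpa using h)
      exact ⟨c, by simpa using hc, hpc⟩
    · refine ⟨a, ?_, by simpa using hp⟩
      simp [List.takeWhile, hp]

theorem pv_tw_le {p : Char → Bool} (u : List Char) : (u.takeWhile p).length ≤ u.length :=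
  (List.takeWhile_prefix p).length_le

-- a takeWhile length is pinned by pointwise facts
theorem pv_tw_len_eq {p : Char → Bool} {l : List Char} {m : Nat} (hml : m ≤ l.length)
    (hall : ∀ j : Nat, j < m → ∃ c, l[j]? = some c ∧ p c = true)
    (hstop : m = l.length ∨ ∃ c, l[m]? = some c ∧ p c = false) :
    (l.takeWhile p).length = m := by
  rcases Nat.lt_trichotomy (l.takeWhile p).length m with h | h | h
  · obtain ⟨c, hc, hpc⟩ := pv_tw_stop (p := p) (u := l) (lt_of_lt_of_le h hml)
    obtain ⟨c', hc', hpc'⟩ := hall _ h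
    rw [hc] at hc'
    cases hc'
    rw [hpc] at hpc'
    exact absurd hpc' (by simp)
  · exact h
  · exfalso
    have hml2 : m < l.length := lt_of_lt_of_le h (pv_tw_le l)
    obtain ⟨c, hc, hpc⟩ := pv_tw_get (p := p) (u := l) (i := m) h
    rcases hstop with h2 | ⟨c', hc', hpc'⟩
    · omega
    · rw [hc] at hc'
      cases hc'
      rw [hpc] at hpc'
      exact absurd hpc' (by simp)

-- appending an element failing the predicate does not change the takeWhile length
theorem pv_tw_append_fail {p : Char → Bool} {x : Char} (hx : p x = false) :
    ∀ (xs : List Char), ((xs ++ [x]).takeWhile p).length = (xs.takeWhile p).length := by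
  intro xs
  induction xs with
  | nil => simp [List.takeWhile, hx]
  | cons a t ih =>
    by_cases hp : p a
    · simp only [List.cons_append, List.takeWhile, hp, List.length_cons]
      omega
    · simp [List.takeWhile, hp]

-- indexing the reverse of a take, by absolute position
theorem pv_rev_take_get (l : List Char) (a j : Nat) (ha : a ≤ l.length) (hj : j < a) :
    ((l.take a).reverse)[j]? = l[a - 1 - j]? := by
  have hlt : (l.take a).length = a := by rw [List.length_take]; omega
  rw [List.getElem?_reverse (by rw [hlt]; omega), hlt, List.getElem?_take, if_pos (by omega)]

-- membership in a drop/take segment, by absolute position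
theorem pv_mem_take_drop {s : List Char} {a m : Nat} {c : Char} :
    c ∈ (s.drop a).take m ↔ ∃ q, q < m ∧ s[a + q]? = some c := by
  constructor
  · intro h
    obtain ⟨i, hi⟩ := List.mem_iff_getElem?.mp h
    rw [List.getElem?_take] at hi
    by_cases him : i < m
    · simp only [him, if_true, List.getElem?_drop] at hi
      exact ⟨i, him, hi⟩
    · simp [him] at hi
  · rintro ⟨q, hq, hgc⟩
    apply List.mem_iff_getElem?.mpr
    exact ⟨q, by rw [List.getElem?_take, if_pos hq, List.getElem?_drop]; exact hgc⟩

-- the dead 'word not in acc' check: the appended values never equal word, so it never fires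
theorem pv_foldl_dead (w : String) (f : Int → String) (p q : Int → Bool)
    (hq : ∀ x, q x = true → f x ≠ w) :
    ∀ (l : List Int) (acc : List String), w ∉ acc →
      l.foldl (fun acc x => if (p x && !(acc.contains w) && q x) then acc ++ [f x] else acc) acc
        = acc ++ (l.filter (fun x => p x && q x)).map f := by
  intro l
  induction l with
  | nil => intro acc _; simp
  | cons x t ih =>
    intro acc hacc
    have hc : acc.contains w = false := by
      simp only [List.contains_eq_mem, decide_eq_false_iff_not]
      exact hacc
    simp only [List.foldl_cons, List.filter_cons, hc, Bool.not_false, Bool.and_true]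
    by_cases hpq : (p x && q x) = true
    · have hfx : f x ≠ w := hq x (by exact (Bool.and_eq_true _ _).mp hpq |>.2)
      rw [if_pos hpq, if_pos hpq, ih (acc ++ [f x]) (by simp [hacc, Ne.symm hfx]), List.map_cons]
      simp
    · rw [if_neg hpq, if_neg hpq, ih acc hacc]

-- length of the space-free run of the sentence starting at position a
def pvTok (sentence : String) (a : Nat) : Nat :=
  ((sentence.toList.drop a).takeWhile (fun c => c != ' ')).length

theorem pv_tok_le (sentence : String) (a : Nat) :
    pvTok sentence a ≤ sentence.toList.length - a := by
  have h := pv_tw_le (p := fun c => c != ' ') (sentence.toList.drop a)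
  simpa [pvTok] using h

-- length of the space-free run extending leftwards from position wiN (exclusive)
def pvTokRev (sentence : String) (wiN : Nat) : Nat :=
  (((sentence.toList.take wiN).reverse).takeWhile (fun c => c != ' ')).length

theorem pv_tokRev_le (sentence : String) (wiN : Nat) : pvTokRev sentence wiN ≤ wiN := by
  have h := pv_tw_le (p := fun c => c != ' ') ((sentence.toList.take wiN).reverse)
  simp only [List.length_reverse, List.length_take] at h
  exact le_trans h (by omega)

-- ===== the tokenizing pass, characterized =====

-- specification of the span list produced by the fold (fuel ≥ length makes it structural)
def pvRunsF : Nat → List Char → Int → List (Int × Int)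
  | 0, _, _ => []
  | _ + 1, [], _ => []
  | fuel + 1, c :: cs, q =>
    if c == ' ' then pvRunsF fuel cs (q + 1)
    else
      ((q, q + (((c :: cs).takeWhile (fun d => d != ' ')).length : Int)) ::
        pvRunsF fuel ((c :: cs).drop ((c :: cs).takeWhile (fun d => d != ' ')).length)
          (q + (((c :: cs).takeWhile (fun d => d != ' ')).length : Int)))

theorem pv_getLast?_drop {l : List Char} {k : Nat} (hk : k < l.length) :
    (l.drop k).getLast? = l.getLast? := by
  conv_rhs => rw [← List.take_append_drop k l]
  rw [List.getLast?_append]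
  have : (l.drop k).getLast? ≠ none := by
    rw [ne_eq, List.getLast?_eq_none_iff, ← ne_eq, ← List.length_pos_iff]
    rw [List.length_drop]
    omega
  cases h : (l.drop k).getLast? with
  | none => exact absurd h this
  | some x => simp

theorem pv_getLast?_cons {c : Char} {cs : List Char} (h : cs ≠ []) :
    (c :: cs).getLast? = cs.getLast? := by
  cases cs with
  | nil => exact absurd rfl h
  | cons d ds => simp [List.getLast?_cons_cons]

-- open-run phase of the fold: it closes the current run at its first space
theorem pv_fold_open : ∀ (cs : List Char) (q s0 : Int) (acc : List (Int × Int)),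
    cs.getLast? = some ' ' →
    (PySem.List.enumerate cs q).foldl altSpanStep (acc, some s0)
      = (PySem.List.enumerate (cs.drop ((cs.takeWhile (fun d => d != ' ')).length))
          (q + ((cs.takeWhile (fun d => d != ' ')).length : Int))).foldl altSpanStep
          (acc ++ [(s0, q + ((cs.takeWhile (fun d => d != ' ')).length : Int))], none) := by
  intro cs
  induction cs with
  | nil => intro q s0 acc h; simp at h
  | cons c cs ih =>
    intro q s0 acc h
    by_cases hc : c = ' '
    · subst hc
      have htw : ((' ' :: cs).takeWhile (fun d => d != ' ')) = [] :=
        List.takeWhile_cons_of_neg (by simp)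
      rw [htw]
      simp only [List.length_nil, Nat.cast_zero, add_zero, List.drop_zero]
      rw [PySem.List.enumerate_cons, List.foldl_cons]
      have hstep : altSpanStep (acc, some s0) (q, ' ') = (acc ++ [(s0, q)], none) := by
        simp [altSpanStep]
      rw [hstep]
      conv_rhs => rw [List.foldl_cons]
      have hstep2 : altSpanStep (acc ++ [(s0, q)], none) (q, ' ') = (acc ++ [(s0, q)], none) := by
        simp [altSpanStep]
      rw [hstep2]
    · have htw : ((c :: cs).takeWhile (fun d => d != ' ')) = c :: cs.takeWhile (fun d => d != ' ') :=
        List.takeWhile_cons_of_pos (by simp [hc])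
      rw [htw]
      simp only [List.length_cons, List.drop_succ_cons]
      rw [PySem.List.enumerate_cons, List.foldl_cons]
      have hstep : altSpanStep (acc, some s0) (q, c) = (acc, some s0) := by
        simp [altSpanStep, hc]
      rw [hstep]
      have hcs : cs ≠ [] := by
        intro hnil
        subst hnil
        simp at h
        exact hc h
      have hlast : cs.getLast? = some ' ' := by
        rwa [pv_getLast?_cons hcs] at h
      rw [ih (q + 1) s0 acc hlast]
      push_cast
      ring_nf

-- closed phase: the fold appends exactly the runs of the remaining text
theorem pv_fold_closed : ∀ (fuel : Nat) (cs : List Char), cs.length ≤ fuel →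
    (cs = [] ∨ cs.getLast? = some ' ') →
    ∀ (q : Int) (acc : List (Int × Int)),
    (PySem.List.enumerate cs q).foldl altSpanStep (acc, none) = (acc ++ pvRunsF fuel cs q, none) := by
  intro fuel
  induction fuel with
  | zero =>
    intro cs hlen _ q acc
    have : cs = [] := List.length_eq_zero_iff.mp (by omega)
    subst this
    simp [pvRunsF, PySem.List.enumerate_nil]
  | succ fuel ih =>
    intro cs hlen hlast q acc
    cases cs with
    | nil => simp [pvRunsF, PySem.List.enumerate_nil]
    | cons c cs =>
      rcases hlast with h | hlast
      · exact absurd h (by simp)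
      rw [PySem.List.enumerate_cons, List.foldl_cons]
      by_cases hc : c = ' '
      · subst hc
        have hstep : altSpanStep (acc, none) (q, ' ') = (acc, none) := by simp [altSpanStep]
        rw [hstep]
        have hcs' : cs = [] ∨ cs.getLast? = some ' ' := by
          cases cs with
          | nil => left; rfl
          | cons d ds =>
            right
            rwa [pv_getLast?_cons (by simp)] at hlast
        rw [ih cs (by simp only [List.length_cons] at hlen; omega) hcs' (q + 1) acc]
        have : pvRunsF (fuel + 1) (' ' :: cs) q = pvRunsF fuel cs (q + 1) := rfl
        rw [this]
      · have hstep : altSpanStep (acc, none) (q, c) = (acc, some q) := by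
          simp [altSpanStep, hc]
        rw [hstep]
        have hcs : cs ≠ [] := by
          intro hnil
          subst hnil
          simp at hlast
          exact hc hlast
        have hlast' : cs.getLast? = some ' ' := by
          rwa [pv_getLast?_cons hcs] at hlast
        rw [pv_fold_open cs (q + 1) q acc hlast']
        set k' := (cs.takeWhile (fun d => d != ' ')).length with hk'
        have hk'lt : k' < cs.length := by
          by_contra hge
          have hle := pv_tw_le (p := fun d => d != ' ') cs
          have hlen1 : 1 ≤ cs.length := List.length_pos_iff.mpr hcs
          obtain ⟨c', hc', hpc'⟩ := pv_tw_get (p := fun d => d != ' ') (u := cs)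
            (i := cs.length - 1) (by omega)
          rw [List.getLast?_eq_getElem?] at hlast'
          rw [hlast'] at hc'
          cases hc'
          simp at hpc'
        have hdrop_last : (cs.drop k').getLast? = some ' ' := by
          rw [pv_getLast?_drop hk'lt]
          exact hlast'
        rw [ih (cs.drop k') (by rw [List.length_drop]; simp only [List.length_cons] at hlen; omega) (Or.inr hdrop_last)
          (q + 1 + (k' : Int)) (acc ++ [(q, q + 1 + (k' : Int))])]
        have htw : ((c :: cs).takeWhile (fun d => d != ' ')) = c :: cs.takeWhile (fun d => d != ' ') :=
          List.takeWhile_cons_of_pos (by simp [hc])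
        have hrw : pvRunsF (fuel + 1) (c :: cs) q
            = (q, q + 1 + (k' : Int)) :: pvRunsF fuel (cs.drop k') (q + 1 + (k' : Int)) := by
          have hcast : q + ((k' + 1 : Nat) : Int) = q + 1 + (k' : Int) := by push_cast; ring
          simp only [pvRunsF, htw, List.length_cons, List.drop_succ_cons, ← hk', hcast]
          rw [if_neg (by simp [hc])]
        rw [hrw]
        simp
      

-- takeWhile stops strictly before a final failing element
theorem pv_tw_lt_of_last {cs : List Char} (h : cs.getLast? = some ' ') :
    (cs.takeWhile (fun d => d != ' ')).length < cs.length := by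
  by_contra hge
  have hle := pv_tw_le (p := fun d => d != ' ') cs
  have hne : cs ≠ [] := by intro hnil; rw [hnil] at h; simp at h
  have hlen1 : 1 ≤ cs.length := List.length_pos_iff.mpr hne
  obtain ⟨c', hc', hpc'⟩ := pv_tw_get (p := fun d => d != ' ') (u := cs)
    (i := cs.length - 1) (by omega)
  rw [List.getLast?_eq_getElem?] at h
  rw [h] at hc'
  cases hc'
  simp at hpc'

theorem pv_altSpans_eq (sentence : String) :
    altSpans sentence = pvRunsF (sentence.toList.length + 1) (sentence.toList ++ [' ']) 0 := by
  rw [altSpans, pv_fold_closed (sentence.toList.length + 1) (sentence.toList ++ [' '])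
    (by simp) (Or.inr (by simp)) 0 []]
  simp

-- every produced span starts at or after the offset
theorem pv_runs_lb : ∀ (fuel : Nat) (cs : List Char) (q : Int) (p : Int × Int),
    p ∈ pvRunsF fuel cs q → q ≤ p.1 := by
  intro fuel
  induction fuel with
  | zero => intro cs q p h; simp [pvRunsF] at h
  | succ fuel ih =>
    intro cs q p h
    cases cs with
    | nil => simp [pvRunsF] at h
    | cons c cs =>
      by_cases hc : c = ' '
      · subst hc
        have hun : pvRunsF (fuel + 1) (' ' :: cs) q = pvRunsF fuel cs (q + 1) := rfl
        rw [hun] at h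
        have := ih cs (q + 1) p h
        omega
      · simp only [pvRunsF] at h
        rw [if_neg (by simp [hc])] at h
        rcases List.mem_cons.mp h with h | h
        · rw [h]
        · have := ih _ _ p h
          have hk : (0 : Int) ≤ (((c :: cs).takeWhile (fun d => d != ' ')).length : Int) := by positivity
          omega

-- every position covered by a produced span holds a non-space character
theorem pv_runs_nonspace : ∀ (fuel : Nat) (cs : List Char) (q : Int) (p : Int × Int),
    p ∈ pvRunsF fuel cs q → ∀ j : Nat, p.1 ≤ q + (j : Int) → q + (j : Int) < p.2 → cs[j]? ≠ some ' ' := by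
  intro fuel
  induction fuel with
  | zero => intro cs q p h; simp [pvRunsF] at h
  | succ fuel ih =>
    intro cs q p h j hj1 hj2
    cases cs with
    | nil => simp [pvRunsF] at h
    | cons c cs =>
      by_cases hc : c = ' '
      · subst hc
        have hun : pvRunsF (fuel + 1) (' ' :: cs) q = pvRunsF fuel cs (q + 1) := rfl
        rw [hun] at h
        have hlb := pv_runs_lb fuel cs (q + 1) p h
        have hj : 1 ≤ j := by omega
        rw [show j = (j - 1) + 1 from by omega, List.getElem?_cons_succ]
        exact ih cs (q + 1) p h (j - 1) (by omega) (by omega)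
      · simp only [pvRunsF] at h
        rw [if_neg (by simp [hc])] at h
        set k := ((c :: cs).takeWhile (fun d => d != ' ')).length with hk
        rcases List.mem_cons.mp h with h | h
        · rw [h] at hj1 hj2
          simp only at hj1 hj2
          have hjk : j < k := by omega
          obtain ⟨c0, hc0, hpc0⟩ := pv_tw_get (p := fun d => d != ' ') (u := c :: cs) (i := j)
            (by omega)
          rw [hc0]
          intro heq
          cases heq
          simp at hpc0
        · have hlb := pv_runs_lb fuel _ _ p h
          have hjk : k ≤ j := by omega
          rw [show j = k + (j - k) from by omega, ← List.getElem?_drop]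
          exact ih _ _ p h (j - k) (by omega) (by omega)

-- scanning leftwards stops at the same space before position k, from either side of a drop
theorem pv_rev_run_shift (cs : List Char) (k a : Nat) (hka : k < a) (ha : a ≤ cs.length)
    (hsp : cs[k]? = some ' ') :
    (((cs.take a).reverse).takeWhile (fun d => d != ' ')).length
      = ((((cs.drop k).take (a - k)).reverse).takeWhile (fun d => d != ' ')).length := by
  set m := ((((cs.drop k).take (a - k)).reverse).takeWhile (fun d => d != ' ')).length with hm
  have hlen2 : ((cs.drop k).take (a - k)).length = a - k := by
    rw [List.length_take, List.length_drop]
    omega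
  have hget2 : ∀ j : Nat, j < a - k → (((cs.drop k).take (a - k)).reverse)[j]? = cs[a - 1 - j]? := by
    intro j hj
    rw [pv_rev_take_get (cs.drop k) (a - k) j (by rw [List.length_drop]; omega) hj,
      List.getElem?_drop]
    congr 1
    omega
  have hmle : m ≤ a - k := by
    have := pv_tw_le (p := fun d => d != ' ') (((cs.drop k).take (a - k)).reverse)
    rw [List.length_reverse, hlen2] at this
    omega
  have hmlt : m < a - k := by
    rcases Nat.lt_or_ge m (a - k) with h | h
    · exact h
    · exfalso
      have hmeq : m = a - k := by omega
      obtain ⟨c0, hc0, hpc0⟩ := pv_tw_get (p := fun d => d != ' ')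
        (u := ((cs.drop k).take (a - k)).reverse) (i := a - k - 1) (by omega)
      rw [hget2 (a - k - 1) (by omega), show a - 1 - (a - k - 1) = k from by omega, hsp] at hc0
      cases hc0
      simp at hpc0
  apply pv_tw_len_eq (l := (cs.take a).reverse) (m := m)
  · rw [List.length_reverse, List.length_take]
    omega
  · intro j hj
    obtain ⟨c0, hc0, hpc0⟩ := pv_tw_get (p := fun d => d != ' ')
      (u := ((cs.drop k).take (a - k)).reverse) (i := j) (by omega)
    refine ⟨c0, ?_, hpc0⟩
    rw [pv_rev_take_get cs a j ha (by omega), ← hget2 j (by omega)]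
    exact hc0
  · right
    obtain ⟨c0, hc0, hpc0⟩ := pv_tw_stop (p := fun d => d != ' ')
      (u := ((cs.drop k).take (a - k)).reverse) (by rw [List.length_reverse, hlen2, ← hm]; omega)
    rw [← hm] at hc0
    refine ⟨c0, ?_, hpc0⟩
    rw [pv_rev_take_get cs a m ha (by omega), ← hget2 m (by omega)]
    exact hc0

-- find? over the produced spans returns exactly the enclosing maximal run
theorem pv_runs_find : ∀ (fuel : Nat) (cs : List Char), cs.length ≤ fuel → ∀ (q : Int) (a b : Nat),
    a < b → b ≤ cs.length → cs.getLast? = some ' ' →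
    (∀ j : Nat, a ≤ j → j < b → cs[j]? ≠ some ' ') →
    (pvRunsF fuel cs q).find? (fun p => decide (p.1 ≤ q + (a : Int)) && decide (q + (b : Int) ≤ p.2))
      = some (q + (a : Int) - ((((cs.take a).reverse).takeWhile (fun d => d != ' ')).length : Int),
              q + (b : Int) + (((cs.drop b).takeWhile (fun d => d != ' ')).length : Int)) := by
  intro fuel
  induction fuel with
  | zero =>
    intro cs hlen q a b hab hb _ _
    exfalso
    have : cs = [] := List.length_eq_zero_iff.mp (by omega)
    subst this
    simp at hb
    omega
  | succ fuel ih =>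
    intro cs hlen q a b hab hb hlast hns
    cases cs with
    | nil => simp at hb; omega
    | cons c cs =>
      by_cases hc : c = ' '
      · subst hc
        have ha1 : 1 ≤ a := by
          by_contra h0
          have ha0 : a = 0 := by omega
          exact hns 0 (by omega) (by omega) rfl
        have hun : pvRunsF (fuel + 1) (' ' :: cs) q = pvRunsF fuel cs (q + 1) := rfl
        have hcs : cs ≠ [] := by
          intro hnil
          subst hnil
          simp at hb
          omega
        have hlast' : cs.getLast? = some ' ' := by
          rwa [pv_getLast?_cons hcs] at hlast
        obtain ⟨a', rfl⟩ : ∃ a', a = a' + 1 := ⟨a - 1, by omega⟩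
        obtain ⟨b', rfl⟩ : ∃ b', b = b' + 1 := ⟨b - 1, by omega⟩
        have hih := ih cs (by simp only [List.length_cons] at hlen; omega) (q + 1) a' b'
          (by omega) (by simp only [List.length_cons] at hb; omega) hlast'
          (by
            intro j hj1 hj2
            have := hns (j + 1) (by omega) (by omega)
            rwa [List.getElem?_cons_succ] at this)
        rw [hun]
        have e1 : q + ((a' + 1 : Nat) : Int) = (q + 1) + (a' : Int) := by push_cast; ring
        have e2 : q + ((b' + 1 : Nat) : Int) = (q + 1) + (b' : Int) := by push_cast; ring
        have e3 : ((' ' :: cs).take (a' + 1)).reverse = (cs.take a').reverse ++ [' '] := by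
          rw [List.take_succ_cons, List.reverse_cons]
        have e4 : (' ' :: cs).drop (b' + 1) = cs.drop b' := List.drop_succ_cons
        rw [e1, e2, e3, e4, pv_tw_append_fail (by simp) ((cs.take a').reverse)]
        exact hih
      · simp only [pvRunsF]
        rw [if_neg (by simp [hc])]
        set k := ((c :: cs).takeWhile (fun d => d != ' ')).length with hk
        have hk1 : 1 ≤ k := by
          rw [hk, List.takeWhile_cons_of_pos (by simp [hc])]
          simp
        clear_value k
        have hklt : k < (c :: cs).length := by rw [hk]; exact pv_tw_lt_of_last hlast
        obtain ⟨csp, hcsp, hpcsp⟩ := pv_tw_stop (p := fun d => d != ' ') (u := c :: cs) (by rw [← hk]; omega)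
        rw [← hk] at hcsp
        have hsp : (c :: cs)[k]? = some ' ' := by
          have : csp = ' ' := by simpa using hpcsp
          rwa [this] at hcsp
        by_cases hbk : b ≤ k
        · rw [List.find?_cons_of_pos (by
            simp only [Bool.and_eq_true, decide_eq_true_eq]
            constructor <;> omega)]
          have hak : a < k := by omega
          congr 1
          have hrev : (((( c :: cs).take a).reverse).takeWhile (fun d => d != ' ')).length = a := by
            apply pv_tw_len_eq
            · rw [List.length_reverse, List.length_take]
              omega
            · intro j hj
              obtain ⟨c0, hc0, hpc0⟩ := pv_tw_get (p := fun d => d != ' ') (u := c :: cs)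
                (i := a - 1 - j) (by omega)
              exact ⟨c0, by rw [pv_rev_take_get (c :: cs) a j (by omega) hj]; exact hc0, hpc0⟩
            · left
              rw [List.length_reverse, List.length_take]
              omega
          have hfwd : (((c :: cs).drop b).takeWhile (fun d => d != ' ')).length = k - b := by
            apply pv_tw_len_eq
            · rw [List.length_drop]
              omega
            · intro j hj
              obtain ⟨c0, hc0, hpc0⟩ := pv_tw_get (p := fun d => d != ' ') (u := c :: cs)
                (i := b + j) (by omega)
              exact ⟨c0, by rw [List.getElem?_drop]; exact hc0, hpc0⟩
            · right
              exact ⟨' ', by rw [List.getElem?_drop, show b + (k - b) = k from by omega]; exact hsp,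
                by simp⟩
          rw [hrev, hfwd, Prod.mk.injEq]
          exact ⟨by omega, by omega⟩
        · have hka : k < a := by
            rcases Nat.lt_or_ge k a with h | h
            · exact h
            · exfalso
              exact hns k (by omega) (by omega) hsp
          rw [List.find?_cons_of_neg (by
            simp only [Bool.and_eq_true, decide_eq_true_eq]
            intro hcon
            omega)]
          have hih := ih ((c :: cs).drop k)
            (by rw [List.length_drop]; simp only [List.length_cons] at hlen ⊢; omega)
            (q + (k : Int)) (a - k) (b - k) (by omega) (by rw [List.length_drop]; omega)
            (by rw [pv_getLast?_drop hklt]; exact hlast)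
            (by
              intro j hj1 hj2
              rw [List.getElem?_drop]
              exact hns (k + j) (by omega) (by omega))
          have e1 : q + (a : Int) = (q + (k : Int)) + ((a - k : Nat) : Int) := by omega
          have e2 : q + (b : Int) = (q + (k : Int)) + ((b - k : Nat) : Int) := by omega
          have e3 : ((((c :: cs).take a).reverse).takeWhile (fun d => d != ' ')).length
              = (((((c :: cs).drop k).take (a - k)).reverse).takeWhile (fun d => d != ' ')).length :=
            pv_rev_run_shift (c :: cs) k a hka (by omega) hsp
          have e4 : (c :: cs).drop b = ((c :: cs).drop k).drop (b - k) := by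
            rw [List.drop_drop]
            congr 1
            omega
          rw [e1, e2, e3, e4]
          exact hih

theorem pv_str_eq {g h : String} (he : g.toList = h.toList) : g = h := String.toList_inj.mp he

theorem pv_seg_toList (sentence : String) (a b : Nat) :
    (PySem.Str.slice sentence (some ((a : Nat) : Int)) (some ((b : Nat) : Int))).toList
      = (sentence.toList.drop a).take (b - a) := by
  rw [PySem.Str.toList_slice, PySem.Chars.slice_eq_listSlice, PySem.List.slice_natCast]

theorem pv_tail_toList (sentence : String) (a : Nat) :
    (PySem.Str.slice sentence (some ((a : Nat) : Int)) none).toList = sentence.toList.drop a := by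
  rw [PySem.Str.toList_slice, PySem.Chars.slice_eq_listSlice,
    PySem.List.slice_from _ (Int.natCast_nonneg a)]
  simp

theorem pv_head_toList (sentence : String) (b : Nat) :
    (PySem.Str.slice sentence none (some ((b : Nat) : Int))).toList = sentence.toList.take b := by
  rw [PySem.Str.toList_slice, PySem.Chars.slice_eq_listSlice, PySem.List.slice_to_natCast]

theorem pv_isIn_space_iff (g : String) : PySem.Str.isIn " " g = true ↔ ' ' ∈ g.toList := by
  rw [PySem.Str.isIn_eq, PySem.Chars.isIn_iff_infix]
  have h1 : (" " : String).toList = [' '] := rfl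
  rw [h1, List.singleton_infix_iff]

-- no space inside the word's occurrence nor in the space-free run after it
theorem pv_no_space_right (sentence word : String) (wiN : Nat)
    (hpre : word.toList <+: sentence.toList.drop wiN)
    (hwsp : ' ' ∉ word.toList) :
    ∀ idx, wiN ≤ idx →
      idx < wiN + word.toList.length + pvTok sentence (wiN + word.toList.length) →
      sentence.toList[idx]? ≠ some ' ' := by
  intro idx h1 h2 hsp
  by_cases hz : idx < wiN + word.toList.length
  · have htake : (sentence.toList.drop wiN).take word.toList.length = word.toList :=
      (List.prefix_iff_eq_take.mp hpre).symm
    have hw : word.toList[idx - wiN]? = some ' ' := by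
      rw [← htake, List.getElem?_take, if_pos (by omega), List.getElem?_drop,
        show wiN + (idx - wiN) = idx from by omega]
      exact hsp
    exact hwsp (List.mem_of_getElem? hw)
  · obtain ⟨c, hc, hcsp⟩ := pv_tw_get (p := fun c => c != ' ')
      (u := sentence.toList.drop (wiN + word.toList.length))
      (i := idx - (wiN + word.toList.length))
      (by
        rw [show ((sentence.toList.drop (wiN + word.toList.length)).takeWhile
            (fun c => c != ' ')).length = pvTok sentence (wiN + word.toList.length) from rfl]
        omega)
    rw [List.getElem?_drop,
      show (wiN + word.toList.length) + (idx - (wiN + word.toList.length)) = idx from by omega,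
      hsp] at hc
    have : c = ' ' := by injection hc.symm
    rw [this] at hcsp
    simp at hcsp

theorem pv_no_space_left (sentence : String) (wiN : Nat) (hwn : wiN ≤ sentence.toList.length) :
    ∀ idx, wiN - pvTokRev sentence wiN ≤ idx → idx < wiN →
      sentence.toList[idx]? ≠ some ' ' := by
  intro idx h1 h2 hsp
  have hkle := pv_tokRev_le sentence wiN
  have htl : (sentence.toList.take wiN).length = wiN := by
    rw [List.length_take]
    omega
  obtain ⟨c, hc, hcsp⟩ := pv_tw_get (p := fun c => c != ' ')
    (u := (sentence.toList.take wiN).reverse) (i := wiN - 1 - idx)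
    (by
      rw [show (((sentence.toList.take wiN).reverse).takeWhile (fun c => c != ' ')).length
          = pvTokRev sentence wiN from rfl]
      omega)
  rw [List.getElem?_reverse (by rw [htl]; omega), htl,
    show wiN - 1 - (wiN - 1 - idx) = idx from by omega,
    List.getElem?_take, if_pos h2, hsp] at hc
  have : c = ' ' := by injection hc.symm
  rw [this] at hcsp
  simp at hcsp

theorem pv_space_at_tok (sentence : String) (a : Nat)
    (h : a + pvTok sentence a < sentence.toList.length) :
    sentence.toList[a + pvTok sentence a]? = some ' ' := by
  obtain ⟨c, hc, hcsp⟩ := pv_tw_stop (p := fun c => c != ' ') (u := sentence.toList.drop a)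
    (by
      rw [show ((sentence.toList.drop a).takeWhile (fun c => c != ' ')).length
          = pvTok sentence a from rfl, List.length_drop]
      omega)
  rw [show ((sentence.toList.drop a).takeWhile (fun c => c != ' ')).length
      = pvTok sentence a from rfl, List.getElem?_drop] at hc
  have hcs : c = ' ' := by simpa using hcsp
  rw [← hcs]
  exact hc

theorem pv_space_at_ls (sentence : String) (wiN : Nat) (hwn : wiN ≤ sentence.toList.length)
    (h : pvTokRev sentence wiN < wiN) :
    sentence.toList[wiN - pvTokRev sentence wiN - 1]? = some ' ' := by
  have htl : (sentence.toList.take wiN).length = wiN := by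
    rw [List.length_take]
    omega
  obtain ⟨c, hc, hcsp⟩ := pv_tw_stop (p := fun c => c != ' ')
    (u := (sentence.toList.take wiN).reverse)
    (by
      rw [show (((sentence.toList.take wiN).reverse).takeWhile (fun c => c != ' ')).length
          = pvTokRev sentence wiN from rfl, List.length_reverse, htl]
      omega)
  rw [show (((sentence.toList.take wiN).reverse).takeWhile (fun c => c != ' ')).length
      = pvTokRev sentence wiN from rfl,
    List.getElem?_reverse (by rw [htl]; omega), htl,
    List.getElem?_take, if_pos (by omega)] at hc
  have hcs : c = ' ' := by simpa using hcsp
  rw [show wiN - pvTokRev sentence wiN - 1 = wiN - 1 - pvTokRev sentence wiN from by omega, ← hcs]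
  exact hc

-- the span lookup finds exactly the enclosing maximal space-free run
theorem pv_find_span (sentence word : String) (wiN : Nat)
    (hlw : 1 ≤ word.toList.length)
    (hpre : word.toList <+: sentence.toList.drop wiN)
    (hwin : wiN ≤ sentence.toList.length)
    (hwsp : ' ' ∉ word.toList) :
    (altSpans sentence).find? (fun p => decide (p.1 ≤ ((wiN : Nat) : Int)) &&
        decide (((wiN + word.toList.length : Nat) : Int) ≤ p.2))
      = some (((wiN - pvTokRev sentence wiN : Nat) : Int),
              ((wiN + word.toList.length + pvTok sentence (wiN + word.toList.length) : Nat) : Int)) := by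
  set n := sentence.toList.length with hn
  set lw := word.toList.length with hlwdef
  have hwn : wiN + lw ≤ n := by
    have h1 := hpre.length_le
    rw [List.length_drop] at h1
    omega
  have htake : (sentence.toList.drop wiN).take lw = word.toList :=
    (List.prefix_iff_eq_take.mp hpre).symm
  have hns : ∀ j : Nat, wiN ≤ j → j < wiN + lw →
      (sentence.toList ++ [' '])[j]? ≠ some ' ' := by
    intro j h1 h2 hspj
    rw [List.getElem?_append_left (by omega)] at hspj
    have hw : word.toList[j - wiN]? = some ' ' := by
      rw [← htake, List.getElem?_take, if_pos (by omega), List.getElem?_drop,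
        show wiN + (j - wiN) = j from by omega]
      exact hspj
    exact hwsp (List.mem_of_getElem? hw)
  have h := pv_runs_find (n + 1) (sentence.toList ++ [' '])
    (by simp only [List.length_append, List.length_cons, List.length_nil]; omega) 0 wiN (wiN + lw)
    (by omega) (by simp only [List.length_append, List.length_cons, List.length_nil]; omega)
    (by simp) hns
  rw [pv_altSpans_eq]
  have erev : (((sentence.toList ++ [' ']).take wiN).reverse.takeWhile (fun d => d != ' ')).length
      = pvTokRev sentence wiN := by
    rw [List.take_append_of_le_length (by omega)]
    rfl
  have efwd : (((sentence.toList ++ [' ']).drop (wiN + lw)).takeWhile (fun d => d != ' ')).length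
      = pvTok sentence (wiN + lw) := by
    rw [List.drop_append_of_le_length (by omega), pv_tw_append_fail (by simp)]
    rfl
  rw [erev, efwd] at h
  simp only [zero_add] at h
  rw [h]
  have h1 := pv_tokRev_le sentence wiN
  congr 1
  rw [Prod.mk.injEq]
  constructor <;> omega

-- a word containing a space lies in no span
theorem pv_find_span_none (sentence word : String) (wiN : Nat)
    (hpre : word.toList <+: sentence.toList.drop wiN)
    (hwin : wiN ≤ sentence.toList.length)
    (hsp : ' ' ∈ word.toList) :
    (altSpans sentence).find? (fun p => decide (p.1 ≤ ((wiN : Nat) : Int)) &&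
        decide (((wiN + word.toList.length : Nat) : Int) ≤ p.2)) = none := by
  set n := sentence.toList.length with hn
  set lw := word.toList.length with hlwdef
  have hwn : wiN + lw ≤ n := by
    have h1 := hpre.length_le
    rw [List.length_drop] at h1
    omega
  have htake : (sentence.toList.drop wiN).take lw = word.toList :=
    (List.prefix_iff_eq_take.mp hpre).symm
  rw [pv_altSpans_eq, List.find?_eq_none]
  intro p hp
  simp only [Bool.and_eq_true, decide_eq_true_eq, not_and]
  intro hp1 hp2
  obtain ⟨t, ht⟩ := List.mem_iff_getElem?.mp hsp
  have htl : t < lw := (List.getElem?_eq_some_iff.mp ht).1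
  have habs : (sentence.toList ++ [' '])[wiN + t]? = some ' ' := by
    rw [List.getElem?_append_left (by omega)]
    rw [← htake, List.getElem?_take, if_pos htl, List.getElem?_drop] at ht
    exact ht
  exact pv_runs_nonspace (n + 1) (sentence.toList ++ [' ']) 0 p hp (wiN + t)
    (by push_cast; omega) (by push_cast; omega) habs

-- proof-side names for the candidate substrings and A's filter on them
def pvSegR (sentence : String) (wiN m : Nat) : String :=
  PySem.Str.slice sentence (some ((wiN : Nat) : Int)) (some ((m : Nat) : Int))

def pvFR (sentence word : String) (wiN : Nat) (x : Int) : String :=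
  PySem.Str.slice sentence (some ((wiN : Nat) : Int)) (some (((wiN : Nat) : Int) + PySem.Str.len word + x))

def pvPRI (sentence word : String) (wiN : Nat) (x : Int) : Bool :=
  decide (1 < PySem.Str.len (pvFR sentence word wiN x)) && !(PySem.Str.isIn " " (pvFR sentence word wiN x))

def pvQRI (sentence word : String) (ngrams : List (String × Int)) (wiN : Nat) (x : Int) : Bool :=
  (pvFR sentence word wiN x != word) && gsNgOk ngrams (pvFR sentence word wiN x)

def pvPR (sentence word : String) (ngrams : List (String × Int)) (wiN m : Nat) : Bool :=
  (decide (1 < PySem.Str.len (pvSegR sentence wiN m)) && !(PySem.Str.isIn " " (pvSegR sentence wiN m)))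
    && ((pvSegR sentence wiN m != word) && gsNgOk ngrams (pvSegR sentence wiN m))

-- A's right loop as a filtered enumeration of end positions
theorem pv_foldR_char (sentence word : String) (ngrams : List (String × Int)) (wiN : Nat) :
    (PySem.List.pyRange 1 ((sentence.toList.length : Int) - (wiN : Int)) 1).foldl
        (gsRightStep sentence word ngrams ((wiN : Nat) : Int)) []
      = ((List.range' (wiN + word.toList.length + 1) (sentence.toList.length - wiN - 1)).filter
          (fun (m : Nat) => pvPR sentence word ngrams wiN m)).map
          (fun (m : Nat) => pvSegR sentence wiN m) := by
  have hq : ∀ x, pvQRI sentence word ngrams wiN x = true → pvFR sentence word wiN x ≠ word := by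
    intro x hx
    have h1 := ((Bool.and_eq_true _ _).mp hx).1
    exact bne_iff_ne.mp h1
  have hstep : (PySem.List.pyRange 1 ((sentence.toList.length : Int) - (wiN : Int)) 1).foldl
      (gsRightStep sentence word ngrams ((wiN : Nat) : Int)) []
      = (PySem.List.pyRange 1 ((sentence.toList.length : Int) - (wiN : Int)) 1).foldl
        (fun acc x => if (pvPRI sentence word wiN x && !(acc.contains word) && pvQRI sentence word ngrams wiN x)
          then acc ++ [pvFR sentence word wiN x] else acc) [] := rfl
  rw [hstep, pv_foldl_dead word (pvFR sentence word wiN) (pvPRI sentence word wiN)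
    (pvQRI sentence word ngrams wiN) hq _ [] (by simp), List.nil_append]
  have hsh : PySem.List.pyRange 1 ((sentence.toList.length : Int) - (wiN : Int)) 1
      = (List.range' (wiN + word.toList.length + 1) (sentence.toList.length - wiN - 1)).map
        (fun (m : Nat) => (m : Int) - ((wiN : Int) + (word.toList.length : Int))) := by
    rw [PySem.List.pyRange_one, List.range'_eq_map_range, List.map_map]
    rw [show ((sentence.toList.length : Int) - (wiN : Int) - 1).toNat = sentence.toList.length - wiN - 1 from by omega]
    apply List.map_congr_left
    intro a _
    simp only [Function.comp_apply]
    push_cast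
    ring
  rw [hsh, List.filter_map, List.map_map]
  have hcomp : ∀ (m : Nat), pvFR sentence word wiN ((m : Int) - ((wiN : Int) + (word.toList.length : Int)))
      = pvSegR sentence wiN m := by
    intro m
    simp only [pvFR, pvSegR]
    have harg : ((wiN : Nat) : Int) + PySem.Str.len word + ((m : Int) - ((wiN : Int) + (word.toList.length : Int)))
        = ((m : Nat) : Int) := by
      rw [PySem.Str.len_eq]
      ring
    rw [harg]
  rw [List.filter_congr (q := fun (m : Nat) => pvPR sentence word ngrams wiN m) (by
    intro m _
    simp only [Function.comp_apply, pvPR, pvPRI, pvQRI, hcomp m])]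
  apply List.map_congr_left
  intro m _
  simp only [Function.comp_apply, hcomp m]

-- per-word equality of the right lists (A's loop vs B's span enumeration), outside the clamped corner
theorem pv_A_rights (sentence word : String) (ngrams : List (String × Int)) (wiN : Nat)
    (hlw : 2 ≤ word.toList.length)
    (hpre : word.toList <+: sentence.toList.drop wiN)
    (hwn : wiN ≤ sentence.toList.length)
    (hwsp : ' ' ∉ word.toList)
    (hnd : ¬ (((wiN : Nat) : Int) + PySem.Str.len word < PySem.Str.len sentence ∧
      PySem.Str.isIn " " (PySem.Str.slice sentence (some ((wiN : Nat) : Int)) none) = false ∧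
      (ngrams.any (fun p => p.1 == PySem.Str.slice sentence (some ((wiN : Nat) : Int)) none)) = true ∧
      0 < (ngrams.lookup (PySem.Str.slice sentence (some ((wiN : Nat) : Int)) none)).getD 0)) :
    (PySem.List.pyRange 1 (PySem.Str.len sentence - ((wiN : Nat) : Int)) 1).foldl
        (gsRightStep sentence word ngrams ((wiN : Nat) : Int)) []
      = ((List.range' (wiN + word.toList.length + 1) (pvTok sentence (wiN + word.toList.length))).filter
          (fun (m : Nat) => gsNgOk ngrams (pvSegR sentence wiN m))).map
          (fun (m : Nat) => pvSegR sentence wiN m) := by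
  set n := sentence.toList.length with hn
  set lw := word.toList.length with hlwdef
  have hlwn : wiN + lw ≤ n := by
    have h1 := hpre.length_le
    rw [List.length_drop] at h1
    omega
  set k := pvTok sentence (wiN + lw) with hk
  have hkle : k ≤ n - (wiN + lw) := pv_tok_le sentence (wiN + lw)
  rw [show PySem.Str.len sentence = ((n : Nat) : Int) from PySem.Str.len_eq sentence,
    pv_foldR_char sentence word ngrams wiN]
  -- split A's range at the end of the space-free run
  have hsplit : List.range' (wiN + lw + 1) (n - wiN - 1)
      = List.range' (wiN + lw + 1) k ++ List.range' (wiN + lw + 1 + k) (n - wiN - 1 - k) := by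
    rw [show (wiN + lw + 1 + k) = (wiN + lw + 1) + 1 * k from by omega, List.range'_append,
      show k + (n - wiN - 1 - k) = n - wiN - 1 from by omega]
  rw [hsplit, List.filter_append, List.map_append]
  -- the region beyond the run contributes nothing
  have hnil : (List.range' (wiN + lw + 1 + k) (n - wiN - 1 - k)).filter
      (fun (m : Nat) => pvPR sentence word ngrams wiN m) = [] := by
    rw [List.filter_eq_nil_iff]
    intro m hm
    rw [List.mem_range'_1] at hm
    simp only [Bool.not_eq_true]
    by_cases hmn : m ≤ n
    · -- the run boundary is a space inside the candidate
      have hsT : sentence.toList[(wiN + lw) + k]? = some ' ' := pv_space_at_tok sentence (wiN + lw) (by omega)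
      have hmem : ' ' ∈ (pvSegR sentence wiN m).toList := by
        rw [pvSegR, pv_seg_toList]
        exact pv_mem_take_drop.mpr ⟨(wiN + lw) + k - wiN, by omega,
          by rw [show wiN + ((wiN + lw) + k - wiN) = (wiN + lw) + k from by omega]; exact hsT⟩
      have hin : PySem.Str.isIn " " (pvSegR sentence wiN m) = true := (pv_isIn_space_iff _).mpr hmem
      rw [pvPR, hin]
      simp
    · -- past the end of the sentence: the clamped candidate is the whole tail
      have hseg : (pvSegR sentence wiN m).toList = sentence.toList.drop wiN := by
        rw [pvSegR, pv_seg_toList]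
        exact List.take_of_length_le (by rw [List.length_drop]; omega)
      by_cases hrn : (wiN + lw) + k = n
      · by_cases hwe : wiN + lw = n
        · -- tail = word itself
          have hwm : (pvSegR sentence wiN m) = word := by
            apply pv_str_eq
            rw [hseg]
            exact (List.IsPrefix.eq_of_length hpre (by rw [List.length_drop]; omega)).symm
          rw [pvPR, hwm]
          simp
        · -- tail strictly longer than the word: excluded by hnd
          have htl : pvSegR sentence wiN m = PySem.Str.slice sentence (some ((wiN : Nat) : Int)) none := by
            apply pv_str_eq
            rw [hseg, pv_tail_toList]
          have hc1 : ((wiN : Nat) : Int) + PySem.Str.len word < PySem.Str.len sentence := by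
            rw [PySem.Str.len_eq, PySem.Str.len_eq, ← hn, ← hlwdef]
            omega
          have hc2 : PySem.Str.isIn " " (PySem.Str.slice sentence (some ((wiN : Nat) : Int)) none) = false := by
            rw [← Bool.not_eq_true, pv_isIn_space_iff, pv_tail_toList]
            intro hmemsp
            obtain ⟨q, hq⟩ := List.mem_iff_getElem?.mp hmemsp
            have hql : q < n - wiN := by
              by_contra hql
              rw [List.getElem?_eq_none (by rw [List.length_drop]; omega)] at hq
              simp at hq
            rw [List.getElem?_drop] at hq
            exact pv_no_space_right sentence word wiN hpre hwsp (wiN + q) (by omega)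
              (by simp only [← hlwdef, ← hk]; omega) hq
          have hok : gsNgOk ngrams (PySem.Str.slice sentence (some ((wiN : Nat) : Int)) none) = false := by
            by_contra hok
            rw [Bool.not_eq_false, gsNgOk, Bool.and_eq_true, decide_eq_true_eq] at hok
            exact hnd ⟨hc1, hc2, hok.1, hok.2⟩
          rw [pvPR, htl, hok]
          simp
      · -- a space occurs before the end of the sentence, inside the clamped tail
        have hsT : sentence.toList[(wiN + lw) + k]? = some ' ' := pv_space_at_tok sentence (wiN + lw) (by omega)
        have hmem : ' ' ∈ (pvSegR sentence wiN m).toList := by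
          rw [pvSegR, pv_seg_toList]
          exact pv_mem_take_drop.mpr ⟨(wiN + lw) + k - wiN, by omega,
            by rw [show wiN + ((wiN + lw) + k - wiN) = (wiN + lw) + k from by omega]; exact hsT⟩
        have hin : PySem.Str.isIn " " (pvSegR sentence wiN m) = true := (pv_isIn_space_iff _).mpr hmem
        rw [pvPR, hin]
        simp
  rw [hnil, List.map_nil, List.append_nil]
  -- inside the run A's filter reduces to the ngram test
  rw [List.filter_congr (q := fun (m : Nat) => gsNgOk ngrams (pvSegR sentence wiN m)) (by
    intro m hm
    rw [List.mem_range'_1] at hm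
    have hmn : m ≤ n := by omega
    have hseg : (pvSegR sentence wiN m).toList = (sentence.toList.drop wiN).take (m - wiN) := by
      rw [pvSegR, pv_seg_toList]
    have hlen : (pvSegR sentence wiN m).toList.length = m - wiN := by
      rw [hseg, List.length_take, List.length_drop]
      omega
    have hdec : decide (1 < PySem.Str.len (pvSegR sentence wiN m)) = true := by
      rw [decide_eq_true_eq, PySem.Str.len_eq, hlen]
      exact_mod_cast (by omega : 1 < m - wiN)
    have hin : PySem.Str.isIn " " (pvSegR sentence wiN m) = false := by
      rw [← Bool.not_eq_true, pv_isIn_space_iff, hseg]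
      intro hmemsp
      obtain ⟨q, hq, hqs⟩ := pv_mem_take_drop.mp hmemsp
      exact pv_no_space_right sentence word wiN hpre hwsp (wiN + q) (by omega)
        (by simp only [← hlwdef, ← hk]; omega) hqs
    have hbne : (pvSegR sentence wiN m != word) = true := by
      rw [bne_iff_ne]
      intro heq
      have := congrArg (fun (g : String) => g.toList.length) heq
      simp only [hlen] at this
      omega
    rw [pvPR, hdec, hin, hbne]
    simp)]

def pvSegL (sentence : String) (weN m : Nat) : String :=
  PySem.Str.slice sentence (some ((m : Nat) : Int)) (some ((weN : Nat) : Int))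

def pvFL (sentence word : String) (wiN : Nat) (x : Int) : String :=
  PySem.Str.slice sentence (some (((wiN : Nat) : Int) - x)) (some (((wiN : Nat) : Int) + PySem.Str.len word))

def pvPLI (sentence word : String) (wiN : Nat) (x : Int) : Bool :=
  decide (1 < PySem.Str.len (pvFL sentence word wiN x)) && !(PySem.Str.isIn " " (pvFL sentence word wiN x))

def pvQLI (sentence word : String) (ngrams : List (String × Int)) (wiN : Nat) (x : Int) : Bool :=
  (pvFL sentence word wiN x != word) && gsNgOk ngrams (pvFL sentence word wiN x)

def pvPL (sentence word : String) (ngrams : List (String × Int)) (weN m : Nat) : Bool :=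
  (decide (1 < PySem.Str.len (pvSegL sentence weN m)) && !(PySem.Str.isIn " " (pvSegL sentence weN m)))
    && ((pvSegL sentence weN m != word) && gsNgOk ngrams (pvSegL sentence weN m))

-- A's left loop as a filtered enumeration of start positions (descending)
theorem pv_foldL_char (sentence word : String) (ngrams : List (String × Int)) (wiN : Nat) :
    (PySem.List.pyRange 1 ((wiN : Nat) : Int) 1).foldl
        (gsLeftStep sentence word ngrams ((wiN : Nat) : Int)) []
      = (((List.range' 1 (wiN - 1)).reverse).filter
          (fun (m : Nat) => pvPL sentence word ngrams (wiN + word.toList.length) m)).map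
          (fun (m : Nat) => pvSegL sentence (wiN + word.toList.length) m) := by
  have hq : ∀ x, pvQLI sentence word ngrams wiN x = true → pvFL sentence word wiN x ≠ word := by
    intro x hx
    exact bne_iff_ne.mp ((Bool.and_eq_true _ _).mp hx).1
  have hstep : (PySem.List.pyRange 1 ((wiN : Nat) : Int) 1).foldl
      (gsLeftStep sentence word ngrams ((wiN : Nat) : Int)) []
      = (PySem.List.pyRange 1 ((wiN : Nat) : Int) 1).foldl
        (fun acc x => if (pvPLI sentence word wiN x && !(acc.contains word) && pvQLI sentence word ngrams wiN x)
          then acc ++ [pvFL sentence word wiN x] else acc) [] := rfl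
  rw [hstep, pv_foldl_dead word (pvFL sentence word wiN) (pvPLI sentence word wiN)
    (pvQLI sentence word ngrams wiN) hq _ [] (by simp), List.nil_append]
  have hsh : PySem.List.pyRange 1 ((wiN : Nat) : Int) 1
      = ((List.range' 1 (wiN - 1)).reverse).map (fun (m : Nat) => ((wiN : Int) - (m : Int))) := by
    rw [List.reverse_range', List.map_map, PySem.List.pyRange_one,
      show ((wiN : Int) - 1).toNat = wiN - 1 from by omega]
    apply List.map_congr_left
    intro a ha
    rw [List.mem_range] at ha
    simp only [Function.comp_apply]
    omega
  rw [hsh, List.filter_map, List.map_map]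
  have hcomp : ∀ (m : Nat), pvFL sentence word wiN ((wiN : Int) - (m : Int))
      = pvSegL sentence (wiN + word.toList.length) m := by
    intro m
    simp only [pvFL, pvSegL]
    rw [show ((wiN : Nat) : Int) - ((wiN : Int) - (m : Int)) = ((m : Nat) : Int) from by ring,
      show ((wiN : Nat) : Int) + PySem.Str.len word = ((wiN + word.toList.length : Nat) : Int) from by
        rw [PySem.Str.len_eq]; push_cast; ring]
  rw [List.filter_congr (q := fun (m : Nat) => pvPL sentence word ngrams (wiN + word.toList.length) m) (by
    intro m _
    simp only [Function.comp_apply, pvPL, pvPLI, pvQLI, hcomp m])]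
  apply List.map_congr_left
  intro m _
  simp only [Function.comp_apply, hcomp m]

-- A's left loop reduced to the ngram test over the in-token start positions (never index 0)
theorem pv_A_lefts (sentence word : String) (ngrams : List (String × Int)) (wiN : Nat)
    (hlw : 2 ≤ word.toList.length)
    (hpre : word.toList <+: sentence.toList.drop wiN)
    (hwn : wiN ≤ sentence.toList.length)
    (hwsp : ' ' ∉ word.toList) :
    (PySem.List.pyRange 1 ((wiN : Nat) : Int) 1).foldl
        (gsLeftStep sentence word ngrams ((wiN : Nat) : Int)) []
      = (((List.range' (max 1 (wiN - pvTokRev sentence wiN)) (wiN - max 1 (wiN - pvTokRev sentence wiN))).reverse).filter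
          (fun (m : Nat) => gsNgOk ngrams (pvSegL sentence (wiN + word.toList.length) m))).map
          (fun (m : Nat) => pvSegL sentence (wiN + word.toList.length) m) := by
  set n := sentence.toList.length with hn
  set lw := word.toList.length with hlwdef
  have hlwn : wiN + lw ≤ n := by
    have h1 := hpre.length_le
    rw [List.length_drop] at h1
    omega
  set kL := pvTokRev sentence wiN with hkL
  have hkle : kL ≤ wiN := pv_tokRev_le sentence wiN
  rw [pv_foldL_char sentence word ngrams wiN]
  simp only [← hlwdef]
  rcases Nat.eq_zero_or_pos wiN with hz | hpos
  · subst hz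
    simp
  · set M := max 1 (wiN - kL) with hM
    have hM1 : 1 ≤ M := by omega
    have hMw : M ≤ wiN := by omega
    have hsplit : List.range' 1 (wiN - 1) = List.range' 1 (M - 1) ++ List.range' M (wiN - M) := by
      have h := List.range'_append (s := 1) (m := M - 1) (n := wiN - M) (step := 1)
      rw [show 1 + 1 * (M - 1) = M from by omega,
        show (M - 1) + (wiN - M) = wiN - 1 from by omega] at h
      exact h.symm
    rw [hsplit, List.reverse_append, List.filter_append, List.map_append]
    have hnil : ((List.range' 1 (M - 1)).reverse).filter
        (fun (m : Nat) => pvPL sentence word ngrams (wiN + lw) m) = [] := by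
      rw [List.filter_eq_nil_iff]
      intro m hm
      rw [List.mem_reverse, List.mem_range'_1] at hm
      have hMk : M = wiN - kL := by omega
      have hkw : kL < wiN := by omega
      have hsp : sentence.toList[wiN - kL - 1]? = some ' ' := by
        rw [hkL]
        exact pv_space_at_ls sentence wiN (by omega) (by rw [← hkL]; omega)
      have hmem : ' ' ∈ (pvSegL sentence (wiN + lw) m).toList := by
        rw [pvSegL, pv_seg_toList]
        exact pv_mem_take_drop.mpr ⟨wiN - kL - 1 - m, by omega,
          by rw [show m + (wiN - kL - 1 - m) = wiN - kL - 1 from by omega]; exact hsp⟩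
      have hin : PySem.Str.isIn " " (pvSegL sentence (wiN + lw) m) = true := (pv_isIn_space_iff _).mpr hmem
      simp only [Bool.not_eq_true, pvPL, hin]
      simp
    rw [hnil, List.map_nil]
    rw [List.filter_congr (q := fun (m : Nat) => gsNgOk ngrams (pvSegL sentence (wiN + lw) m)) (by
      intro m hm
      rw [List.mem_reverse, List.mem_range'_1] at hm
      have hseg : (pvSegL sentence (wiN + lw) m).toList = (sentence.toList.drop m).take (wiN + lw - m) := by
        rw [pvSegL, pv_seg_toList]
      have hlen : (pvSegL sentence (wiN + lw) m).toList.length = wiN + lw - m := by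
        rw [hseg, List.length_take, List.length_drop]
        omega
      have hdec : decide (1 < PySem.Str.len (pvSegL sentence (wiN + lw) m)) = true := by
        rw [decide_eq_true_eq, PySem.Str.len_eq, hlen]
        exact_mod_cast (by omega : 1 < wiN + lw - m)
      have hin : PySem.Str.isIn " " (pvSegL sentence (wiN + lw) m) = false := by
        rw [← Bool.not_eq_true, pv_isIn_space_iff, hseg]
        intro hmemsp
        obtain ⟨q, hq, hqs⟩ := pv_mem_take_drop.mp hmemsp
        by_cases hqw : m + q < wiN
        · exact pv_no_space_left sentence wiN (by omega) (m + q) (by rw [← hkL]; omega) hqw hqs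
        · exact pv_no_space_right sentence word wiN hpre hwsp (m + q)
            (by omega) (by simp only [← hlwdef]; omega) hqs
      have hbne : (pvSegL sentence (wiN + lw) m != word) = true := by
        rw [bne_iff_ne]
        intro heq
        have := congrArg (fun (g : String) => g.toList.length) heq
        simp only [hlen] at this
        omega
      simp only [pvPL, hdec, hin, hbne, Bool.not_false, Bool.true_and, Bool.and_true])]
    simp

-- a word containing a space never collects anything (every candidate contains the word)
theorem pv_rights_space_nil (sentence word : String) (ngrams : List (String × Int)) (wiN : Nat)
    (hpre : word.toList <+: sentence.toList.drop wiN)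
    (hsp : ' ' ∈ word.toList) :
    (PySem.List.pyRange 1 ((sentence.toList.length : Int) - (wiN : Int)) 1).foldl
        (gsRightStep sentence word ngrams ((wiN : Nat) : Int)) [] = [] := by
  rw [pv_foldR_char]
  have hnil : (List.range' (wiN + word.toList.length + 1) (sentence.toList.length - wiN - 1)).filter
      (fun (m : Nat) => pvPR sentence word ngrams wiN m) = [] := by
    rw [List.filter_eq_nil_iff]
    intro m hm
    rw [List.mem_range'_1] at hm
    obtain ⟨q, hq⟩ := List.mem_iff_getElem?.mp hsp
    have hql : q < word.toList.length := (List.getElem?_eq_some_iff.mp hq).1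
    have htake : (sentence.toList.drop wiN).take word.toList.length = word.toList :=
      (List.prefix_iff_eq_take.mp hpre).symm
    have hs : sentence.toList[wiN + q]? = some ' ' := by
      have h1 : ((sentence.toList.drop wiN).take word.toList.length)[q]? = some ' ' := by
        rw [htake]
        exact hq
      rw [List.getElem?_take, if_pos hql, List.getElem?_drop] at h1
      exact h1
    have hmem : ' ' ∈ (pvSegR sentence wiN m).toList := by
      rw [pvSegR, pv_seg_toList]
      exact pv_mem_take_drop.mpr ⟨q, by omega, hs⟩
    simp only [Bool.not_eq_true, pvPR, (pv_isIn_space_iff _).mpr hmem]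
    simp
  rw [hnil, List.map_nil]

theorem pv_lefts_space_nil (sentence word : String) (ngrams : List (String × Int)) (wiN : Nat)
    (hpre : word.toList <+: sentence.toList.drop wiN)
    (hsp : ' ' ∈ word.toList) :
    (PySem.List.pyRange 1 ((wiN : Nat) : Int) 1).foldl
        (gsLeftStep sentence word ngrams ((wiN : Nat) : Int)) [] = [] := by
  rw [pv_foldL_char]
  have hnil : ((List.range' 1 (wiN - 1)).reverse).filter
      (fun (m : Nat) => pvPL sentence word ngrams (wiN + word.toList.length) m) = [] := by
    rw [List.filter_eq_nil_iff]
    intro m hm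
    rw [List.mem_reverse, List.mem_range'_1] at hm
    obtain ⟨q, hq⟩ := List.mem_iff_getElem?.mp hsp
    have hql : q < word.toList.length := (List.getElem?_eq_some_iff.mp hq).1
    have htake : (sentence.toList.drop wiN).take word.toList.length = word.toList :=
      (List.prefix_iff_eq_take.mp hpre).symm
    have hs : sentence.toList[wiN + q]? = some ' ' := by
      have h1 : ((sentence.toList.drop wiN).take word.toList.length)[q]? = some ' ' := by
        rw [htake]
        exact hq
      rw [List.getElem?_take, if_pos hql, List.getElem?_drop] at h1
      exact h1
    have hmem : ' ' ∈ (pvSegL sentence (wiN + word.toList.length) m).toList := by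
      rw [pvSegL, pv_seg_toList]
      refine pv_mem_take_drop.mpr ⟨wiN - m + q, by omega, ?_⟩
      rw [show m + (wiN - m + q) = wiN + q from by omega]
      exact hs
    simp only [Bool.not_eq_true, pvPL, (pv_isIn_space_iff _).mpr hmem]
    simp
  rw [hnil, List.map_nil]

-- ===== B's comprehensions as filtered Nat ranges =====

theorem pv_pyRange_natCast (a k : Nat) :
    PySem.List.pyRange ((a : Nat) : Int) ((a + k : Nat) : Int) 1
      = (List.range' a k).map (fun m : Nat => ((m : Nat) : Int)) := by
  rw [PySem.List.pyRange_one, List.range'_eq_map_range, List.map_map]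
  rw [show (((a + k : Nat) : Int) - ((a : Nat) : Int)).toNat = k from by omega]
  apply List.map_congr_left
  intro m _
  simp only [Function.comp_apply]
  push_cast
  ring

theorem pv_B_rights (sentence : String) (ngrams : List (String × Int)) (wiN a k : Nat) :
    ((PySem.List.pyRange ((a : Nat) : Int) ((a + k : Nat) : Int) 1).filter
        (fun j => gsNgOk ngrams (PySem.Str.slice sentence (some ((wiN : Nat) : Int)) (some j)))).map
        (fun j => PySem.Str.slice sentence (some ((wiN : Nat) : Int)) (some j))
      = ((List.range' a k).filter (fun m : Nat => gsNgOk ngrams (pvSegR sentence wiN m))).map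
          (fun m : Nat => pvSegR sentence wiN m) := by
  rw [pv_pyRange_natCast, List.filter_map, List.map_map]
  rfl

theorem pv_B_lefts (sentence : String) (ngrams : List (String × Int)) (weN s0 k : Nat) :
    (((PySem.List.pyRange ((s0 : Nat) : Int) ((s0 + k : Nat) : Int) 1).reverse).filter
        (fun i => gsNgOk ngrams (PySem.Str.slice sentence (some i) (some ((weN : Nat) : Int))))).map
        (fun i => PySem.Str.slice sentence (some i) (some ((weN : Nat) : Int)))
      = (((List.range' s0 k).reverse).filter (fun m : Nat => gsNgOk ngrams (pvSegL sentence weN m))).map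
          (fun m : Nat => pvSegL sentence weN m) := by
  rw [pv_pyRange_natCast, ← List.map_reverse, List.filter_map, List.map_map]
  rfl

theorem pv_B_rights' (sentence : String) (ngrams : List (String × Int)) (wiN lo hi : Nat)
    (h : lo ≤ hi) :
    ((PySem.List.pyRange ((lo : Nat) : Int) ((hi : Nat) : Int) 1).filter
        (fun j => gsNgOk ngrams (PySem.Str.slice sentence (some ((wiN : Nat) : Int)) (some j)))).map
        (fun j => PySem.Str.slice sentence (some ((wiN : Nat) : Int)) (some j))
      = ((List.range' lo (hi - lo)).filter (fun m : Nat => gsNgOk ngrams (pvSegR sentence wiN m))).map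
          (fun m : Nat => pvSegR sentence wiN m) := by
  rw [show ((hi : Nat) : Int) = ((lo + (hi - lo) : Nat) : Int) from by omega]
  exact pv_B_rights sentence ngrams wiN lo (hi - lo)

theorem pv_B_lefts' (sentence : String) (ngrams : List (String × Int)) (weN s0 e : Nat)
    (h : s0 ≤ e) :
    (((PySem.List.pyRange ((s0 : Nat) : Int) ((e : Nat) : Int) 1).reverse).filter
        (fun i => gsNgOk ngrams (PySem.Str.slice sentence (some i) (some ((weN : Nat) : Int))))).map
        (fun i => PySem.Str.slice sentence (some i) (some ((weN : Nat) : Int)))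
      = (((List.range' s0 (e - s0)).reverse).filter (fun m : Nat => gsNgOk ngrams (pvSegL sentence weN m))).map
          (fun m : Nat => pvSegL sentence weN m) := by
  rw [show ((e : Nat) : Int) = ((s0 + (e - s0) : Nat) : Int) from by omega]
  exact pv_B_lefts sentence ngrams weN s0 (e - s0)

-- the head candidate of B's left list, as the untruncated sentence prefix
theorem pv_segL_zero (sentence : String) (weN : Nat) :
    pvSegL sentence weN 0 = PySem.Str.slice sentence none (some ((weN : Nat) : Int)) := by
  apply pv_str_eq
  rw [pvSegL, pv_seg_toList, pv_head_toList, List.drop_zero, Nat.sub_zero]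

-- A's left loop equals B's span enumeration, outside the index-0 corner
theorem pv_lefts_combined (sentence word : String) (ngrams : List (String × Int)) (wiN : Nat)
    (hlw : 2 ≤ word.toList.length)
    (hpre : word.toList <+: sentence.toList.drop wiN)
    (hwn : wiN ≤ sentence.toList.length)
    (hwsp : ' ' ∉ word.toList)
    (hnd2 : ¬ (1 ≤ wiN ∧
      PySem.Str.isIn " " (PySem.Str.slice sentence none (some ((wiN + word.toList.length : Nat) : Int))) = false ∧
      (ngrams.any (fun p => p.1 == PySem.Str.slice sentence none (some ((wiN + word.toList.length : Nat) : Int)))) = true ∧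
      0 < (ngrams.lookup (PySem.Str.slice sentence none (some ((wiN + word.toList.length : Nat) : Int)))).getD 0)) :
    (PySem.List.pyRange 1 ((wiN : Nat) : Int) 1).foldl
        (gsLeftStep sentence word ngrams ((wiN : Nat) : Int)) []
      = (((List.range' (wiN - pvTokRev sentence wiN) (pvTokRev sentence wiN)).reverse).filter
          (fun (m : Nat) => gsNgOk ngrams (pvSegL sentence (wiN + word.toList.length) m))).map
          (fun (m : Nat) => pvSegL sentence (wiN + word.toList.length) m) := by
  set n := sentence.toList.length with hn
  set lw := word.toList.length with hlwdef
  have hlwn : wiN + lw ≤ n := by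
    have h1 := hpre.length_le
    rw [List.length_drop] at h1
    omega
  set kL := pvTokRev sentence wiN with hkL
  have hkle : kL ≤ wiN := pv_tokRev_le sentence wiN
  rw [pv_A_lefts sentence word ngrams wiN hlw hpre hwn hwsp]
  simp only [← hlwdef, ← hkL]
  clear_value kL
  by_cases hcase : 1 ≤ wiN - kL
  · rw [show max 1 (wiN - kL) = wiN - kL from by omega,
      show wiN - (wiN - kL) = kL from by omega]
  · rcases Nat.eq_zero_or_pos wiN with hz | hpos
    · subst hz
      simp [show kL = 0 from by omega]
    · have hkw : kL = wiN := by omega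
      obtain ⟨w', rfl⟩ : ∃ w', wiN = w' + 1 := ⟨wiN - 1, by omega⟩
      rw [show max 1 (w' + 1 - kL) = 1 from by omega, show w' + 1 - kL = 0 from by omega,
        hkw, List.range'_succ, Nat.add_sub_cancel, List.reverse_cons, List.filter_append,
        List.map_append, show 0 + 1 = 1 from rfl]
      have hok0 : gsNgOk ngrams (pvSegL sentence (w' + 1 + lw) 0) = false := by
        by_contra hok
        rw [Bool.not_eq_false, gsNgOk, Bool.and_eq_true, decide_eq_true_eq, pv_segL_zero] at hok
        have hnosp : PySem.Str.isIn " " (PySem.Str.slice sentence none (some ((w' + 1 + lw : Nat) : Int))) = false := by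
          rw [← Bool.not_eq_true, pv_isIn_space_iff, pv_head_toList]
          intro hmemsp
          obtain ⟨q, hq⟩ := List.mem_iff_getElem?.mp hmemsp
          have hql : q < w' + 1 + lw := by
            by_contra hqge
            rw [List.getElem?_eq_none (by rw [List.length_take]; omega)] at hq
            simp at hq
          rw [List.getElem?_take, if_pos hql] at hq
          by_cases hqw : q < w' + 1
          · exact pv_no_space_left sentence (w' + 1) (by omega) q (by omega) hqw hq
          · exact pv_no_space_right sentence word (w' + 1) hpre hwsp q (by omega)
              (by simp only [← hlwdef]; omega) hq
        exact hnd2 ⟨by omega, hnosp, hok.1, hok.2⟩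
      rw [List.filter_singleton]
      simp only [hok0]
      simp

-- a positive first-match count implies dict membership
theorem pv_any_of_lookup : ∀ (l : List (String × Int)) (g : String),
    0 < (l.lookup g).getD 0 → l.any (fun p => p.1 == g) = true := by
  intro l g h
  induction l with
  | nil => simp [List.lookup] at h
  | cons p t ih =>
    rcases p with ⟨k, v⟩
    rw [List.any_cons]
    by_cases hk : g = k
    · subst hk
      simp
    · rw [List.lookup_cons, show (g == k) = false from by simpa using hk] at h
      rw [ih h, Bool.or_true]

-- the whole per-word step agrees, outside the edge corners for this word
theorem pv_word_eq (sentence : String) (ngrams : List (String × Int)) (word : String)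
    (hnd : ¬ (2 ≤ PySem.Str.len word ∧ 0 ≤ PySem.Str.find sentence word ∧
      ((PySem.Str.find sentence word + PySem.Str.len word < PySem.Str.len sentence ∧
        PySem.Str.isIn " " (PySem.Str.slice sentence (some (PySem.Str.find sentence word)) none) = false ∧
        (ngrams.any (fun p => p.1 == PySem.Str.slice sentence (some (PySem.Str.find sentence word)) none)) = true ∧
        0 < (ngrams.lookup (PySem.Str.slice sentence (some (PySem.Str.find sentence word)) none)).getD 0)
      ∨ (1 ≤ PySem.Str.find sentence word ∧
        PySem.Str.isIn " " (PySem.Str.slice sentence none (some (PySem.Str.find sentence word + PySem.Str.len word))) = false ∧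
        (ngrams.any (fun p => p.1 == PySem.Str.slice sentence none (some (PySem.Str.find sentence word + PySem.Str.len word)))) = true ∧
        0 < (ngrams.lookup (PySem.Str.slice sentence none (some (PySem.Str.find sentence word + PySem.Str.len word)))).getD 0))))
    (d : PySem.Dict String (List (String × List String))) :
    gsWordStep sentence ngrams d word
      = if PySem.Str.len word < 2 then d
        else d.insert word (altWordEntry sentence ngrams word) := by
  simp only [gsWordStep, altWordEntry]
  by_cases hlen : PySem.Str.len word < 2
  · rw [if_pos hlen, if_pos hlen]
  · rw [if_neg hlen, if_neg hlen]
    have hlw : 2 ≤ word.toList.length := by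
      rw [PySem.Str.len_eq] at hlen
      omega
    have h2str : 2 ≤ PySem.Str.len word := by
      rw [PySem.Str.len_eq]
      exact_mod_cast hlw
    by_cases hfind : 0 ≤ PySem.Str.find sentence word
    · rw [if_pos hfind, if_pos hfind]
      set wiN := (PySem.Str.find sentence word).toNat with hwiN
      have hwicast : PySem.Str.find sentence word = ((wiN : Nat) : Int) := by omega
      have hfands := PySem.Chars.find_spec (s := sentence.toList) (sub := word.toList)
        (by rwa [PySem.Str.find_eq] at hfind)
      have hpre : word.toList <+: sentence.toList.drop wiN := by
        have h1 := hfands.1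
        rwa [show (PySem.Chars.find sentence.toList word.toList).toNat = wiN from by
          rw [← PySem.Str.find_eq]] at h1
      have hwn : wiN ≤ sentence.toList.length := by
        have h1 := PySem.Chars.find_le_length sentence.toList word.toList
        rw [← PySem.Str.find_eq] at h1
        omega
      have hwe : ((wiN : Nat) : Int) + PySem.Str.len word = ((wiN + word.toList.length : Nat) : Int) := by
        rw [PySem.Str.len_eq]
        push_cast
        ring
      rw [hwicast, hwe]
      by_cases hwsp : PySem.Str.isIn " " word = true
      · -- the word itself contains a space: A's filters kill everything, B finds no span
        have hmem : ' ' ∈ word.toList := (pv_isIn_space_iff word).mp hwsp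
        rw [pv_find_span_none sentence word wiN hpre hwn hmem]
        rw [show PySem.Str.len sentence = ((sentence.toList.length : Nat) : Int) from
            PySem.Str.len_eq sentence,
          pv_rights_space_nil sentence word ngrams wiN hpre hmem,
          pv_lefts_space_nil sentence word ngrams wiN hpre hmem,
          PySem.Dict.insert_insert_self]
      · have hmemn : ' ' ∉ word.toList := by
          rw [Bool.not_eq_true] at hwsp
          intro hc
          rw [(pv_isIn_space_iff word).mpr hc] at hwsp
          exact Bool.noConfusion hwsp
        rw [pv_find_span sentence word wiN (by omega) hpre hwn hmemn]
        -- B's two comprehensions over the span, as Nat ranges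
        have e5 : ((wiN + word.toList.length : Nat) : Int) + 1
            = ((wiN + word.toList.length + 1 : Nat) : Int) := by push_cast; ring
        have e6 : ((wiN + word.toList.length + pvTok sentence (wiN + word.toList.length) : Nat) : Int) + 1
            = ((wiN + word.toList.length + pvTok sentence (wiN + word.toList.length) + 1 : Nat) : Int) := by
          push_cast; ring
        simp only [e5, e6]
        rw [pv_B_rights' sentence ngrams wiN (wiN + word.toList.length + 1)
            (wiN + word.toList.length + pvTok sentence (wiN + word.toList.length) + 1) (by omega),
          pv_B_lefts' sentence ngrams (wiN + word.toList.length) (wiN - pvTokRev sentence wiN) wiN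
            (by have := pv_tokRev_le sentence wiN; omega)]
        rw [show wiN + word.toList.length + pvTok sentence (wiN + word.toList.length) + 1
            - (wiN + word.toList.length + 1) = pvTok sentence (wiN + word.toList.length) from by omega,
          show wiN - (wiN - pvTokRev sentence wiN) = pvTokRev sentence wiN from by
            have := pv_tokRev_le sentence wiN; omega]
        have hnd1 : ¬ (((wiN : Nat) : Int) + PySem.Str.len word < PySem.Str.len sentence ∧
            PySem.Str.isIn " " (PySem.Str.slice sentence (some ((wiN : Nat) : Int)) none) = false ∧
            (ngrams.any (fun p => p.1 == PySem.Str.slice sentence (some ((wiN : Nat) : Int)) none)) = true ∧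
            0 < (ngrams.lookup (PySem.Str.slice sentence (some ((wiN : Nat) : Int)) none)).getD 0) := by
          intro hc
          apply hnd
          refine ⟨h2str, hfind, Or.inl ?_⟩
          rw [hwicast]
          exact hc
        have hnd2 : ¬ (1 ≤ wiN ∧
            PySem.Str.isIn " " (PySem.Str.slice sentence none (some ((wiN + word.toList.length : Nat) : Int))) = false ∧
            (ngrams.any (fun p => p.1 == PySem.Str.slice sentence none (some ((wiN + word.toList.length : Nat) : Int)))) = true ∧
            0 < (ngrams.lookup (PySem.Str.slice sentence none (some ((wiN + word.toList.length : Nat) : Int)))).getD 0) := by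
          intro hc
          apply hnd
          refine ⟨h2str, hfind, Or.inr ?_⟩
          rw [hwicast, hwe]
          exact ⟨by omega, hc.2.1, hc.2.2.1, hc.2.2.2⟩
        rw [pv_A_rights sentence word ngrams wiN hlw hpre hwn hmemn hnd1,
          pv_lefts_combined sentence word ngrams wiN hlw hpre hwn hmemn hnd2,
          PySem.Dict.insert_insert_self]
    · rw [if_neg hfind, if_neg hfind]

theorem pv_main : ∀ (words_list : List String) (sentence : String) (ngrams : List (String × Int)), ¬ D_get_superlap_py words_list sentence ngrams → get_superlap_py words_list sentence ngrams = get_superlap_py_alt words_list sentence ngrams := by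
  intro words_list sentence ngrams hD
  rw [get_superlap_py, get_superlap_py_alt]
  congr 1
  apply PySem.List.foldl_congr_mem'
  intro word hw d
  apply pv_word_eq
  intro hbody
  apply hD
  refine ⟨word, hw, hbody.1, hbody.2.1, ?_⟩
  rcases hbody.2.2 with ⟨h1, h2, h3, h4⟩ | ⟨h1, h2, h3, h4⟩
  · exact Or.inl ⟨h1, h2, h4⟩
  · exact Or.inr ⟨h1, h2, h4⟩

-- === tightness: inside D_ the two programs really differ ===

def pvAVal (sentence : String) (ngrams : List (String × Int)) (word : String) : List (String × List String) :=
  if 0 ≤ PySem.Str.find sentence word then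
    [("left", (PySem.List.pyRange 1 (PySem.Str.find sentence word) 1).foldl
        (gsLeftStep sentence word ngrams (PySem.Str.find sentence word)) []),
     ("right", (PySem.List.pyRange 1 (PySem.Str.len sentence - PySem.Str.find sentence word) 1).foldl
        (gsRightStep sentence word ngrams (PySem.Str.find sentence word)) [])]
  else [("left", []), ("right", [])]

theorem pv_stepA_eq (sentence : String) (ngrams : List (String × Int)) (word : String)
    (h : ¬ PySem.Str.len word < 2) (d : PySem.Dict String (List (String × List String))) :
    gsWordStep sentence ngrams d word = d.insert word (pvAVal sentence ngrams word) := by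
  simp only [gsWordStep, pvAVal, if_neg h]
  by_cases hf : 0 ≤ PySem.Str.find sentence word
  · rw [if_pos hf, if_pos hf, PySem.Dict.insert_insert_self]
  · rw [if_neg hf, if_neg hf]

theorem pv_preserveA (sentence : String) (ngrams : List (String × Int)) (w : String) :
    ∀ (t : List String) (d : PySem.Dict String (List (String × List String))), w ∉ t →
      (t.foldl (gsWordStep sentence ngrams) d).get? w = d.get? w := by
  intro t
  induction t with
  | nil => intro d _; rfl
  | cons x s ih =>
    intro d hw
    rw [List.foldl_cons, ih _ (by simp at hw; exact hw.2)]
    have hxw : w ≠ x := by simp at hw; exact hw.1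
    by_cases hx : PySem.Str.len x < 2
    · simp only [gsWordStep, if_pos hx]
    · rw [pv_stepA_eq sentence ngrams x hx, PySem.Dict.get?_insert_of_ne _ _ hxw]

theorem pv_lookupA (sentence : String) (ngrams : List (String × Int)) (w : String)
    (hw2 : ¬ PySem.Str.len w < 2) :
    ∀ (t : List String) (d : PySem.Dict String (List (String × List String))), w ∈ t →
      (t.foldl (gsWordStep sentence ngrams) d).get? w = some (pvAVal sentence ngrams w) := by
  intro t
  induction t with
  | nil => intro d h; simp at h
  | cons x s ih =>
    intro d hmem
    rw [List.foldl_cons]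
    by_cases hx : w ∈ s
    · exact ih _ hx
    · have hwx : w = x := by
        rcases List.mem_cons.mp hmem with h | h
        · exact h
        · exact absurd h hx
      subst hwx
      rw [pv_preserveA sentence ngrams w s _ hx, pv_stepA_eq sentence ngrams w hw2,
        PySem.Dict.get?_insert_self]

theorem pv_preserveB (sentence : String) (ngrams : List (String × Int)) (w : String) :
    ∀ (t : List String) (d : PySem.Dict String (List (String × List String))), w ∉ t →
      (t.foldl (fun d word => if PySem.Str.len word < 2 then d
          else d.insert word (altWordEntry sentence ngrams word)) d).get? w = d.get? w := by
  intro t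
  induction t with
  | nil => intro d _; rfl
  | cons x s ih =>
    intro d hw
    rw [List.foldl_cons, ih _ (by simp at hw; exact hw.2)]
    have hxw : w ≠ x := by simp at hw; exact hw.1
    by_cases hx : PySem.Str.len x < 2
    · rw [if_pos hx]
    · rw [if_neg hx, PySem.Dict.get?_insert_of_ne _ _ hxw]

theorem pv_lookupB (sentence : String) (ngrams : List (String × Int)) (w : String)
    (hw2 : ¬ PySem.Str.len w < 2) :
    ∀ (t : List String) (d : PySem.Dict String (List (String × List String))), w ∈ t →
      (t.foldl (fun d word => if PySem.Str.len word < 2 then d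
          else d.insert word (altWordEntry sentence ngrams word)) d).get? w
        = some (altWordEntry sentence ngrams w) := by
  intro t
  induction t with
  | nil => intro d h; simp at h
  | cons x s ih =>
    intro d hmem
    rw [List.foldl_cons]
    by_cases hx : w ∈ s
    · exact ih _ hx
    · have hwx : w = x := by
        rcases List.mem_cons.mp hmem with h | h
        · exact h
        · exact absurd h hx
      subst hwx
      rw [pv_preserveB sentence ngrams w s _ hx, if_neg hw2, PySem.Dict.get?_insert_self]

-- inside the right corner, A's right list strictly extends B's by the duplicated tail
theorem pv_rights_diff (sentence word : String) (ngrams : List (String × Int)) (wiN : Nat)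
    (hlw : 2 ≤ word.toList.length)
    (hpre : word.toList <+: sentence.toList.drop wiN)
    (hwn : wiN ≤ sentence.toList.length)
    (hlt : wiN + word.toList.length < sentence.toList.length)
    (htail_nsp : ' ' ∉ sentence.toList.drop wiN)
    (hok : gsNgOk ngrams (PySem.Str.slice sentence (some ((wiN : Nat) : Int)) none) = true) :
    (PySem.List.pyRange 1 ((sentence.toList.length : Int) - (wiN : Int)) 1).foldl
        (gsRightStep sentence word ngrams ((wiN : Nat) : Int)) []
      ≠ ((List.range' (wiN + word.toList.length + 1) (pvTok sentence (wiN + word.toList.length))).filter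
          (fun (m : Nat) => gsNgOk ngrams (pvSegR sentence wiN m))).map
          (fun (m : Nat) => pvSegR sentence wiN m) := by
  set n := sentence.toList.length with hn
  set lw := word.toList.length with hlwdef
  have hwsp : ' ' ∉ word.toList := by
    intro hc
    have htake : (sentence.toList.drop wiN).take lw = word.toList :=
      (List.prefix_iff_eq_take.mp hpre).symm
    exact htail_nsp (by rw [← htake] at hc; exact List.take_subset _ _ hc)
  -- the space-free run reaches the end of the sentence
  have hk : pvTok sentence (wiN + lw) = n - (wiN + lw) := by
    have hle := pv_tok_le sentence (wiN + lw)
    by_contra hne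
    have hlt2 : (wiN + lw) + pvTok sentence (wiN + lw) < n := by omega
    have hsT := pv_space_at_tok sentence (wiN + lw) (by omega)
    apply htail_nsp
    have h1 : (sentence.toList.drop (wiN + lw))[pvTok sentence (wiN + lw)]? = some ' ' := by
      rw [List.getElem?_drop]
      exact hsT
    have h2 : ' ' ∈ sentence.toList.drop (wiN + lw) := List.mem_of_getElem? h1
    have h3 : ' ' ∈ (sentence.toList.drop wiN).drop lw := by
      rw [List.drop_drop]
      exact h2
    exact List.drop_subset _ _ h3
  rw [pv_foldR_char sentence word ngrams wiN]
  intro heq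
  have hlens := congrArg List.length heq
  rw [List.length_map, List.length_map] at hlens
  have hsplit : List.range' (wiN + lw + 1) (n - wiN - 1)
      = List.range' (wiN + lw + 1) (n - (wiN + lw)) ++ List.range' (n + 1) (lw - 1) := by
    have h := List.range'_append (s := wiN + lw + 1) (m := n - (wiN + lw)) (n := lw - 1) (step := 1)
    rw [show wiN + lw + 1 + 1 * (n - (wiN + lw)) = n + 1 from by omega,
      show (n - (wiN + lw)) + (lw - 1) = n - wiN - 1 from by omega] at h
    exact h.symm
  rw [hsplit, List.filter_append, List.length_append] at hlens
  -- beyond the sentence end every candidate passes A's filter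
  have hfull : (List.range' (n + 1) (lw - 1)).filter
      (fun (m : Nat) => pvPR sentence word ngrams wiN m) = List.range' (n + 1) (lw - 1) := by
    rw [List.filter_eq_self]
    intro m hm
    rw [List.mem_range'_1] at hm
    have hseg : (pvSegR sentence wiN m).toList = sentence.toList.drop wiN := by
      rw [pvSegR, pv_seg_toList]
      exact List.take_of_length_le (by rw [List.length_drop]; omega)
    have htl : pvSegR sentence wiN m = PySem.Str.slice sentence (some ((wiN : Nat) : Int)) none := by
      apply pv_str_eq
      rw [hseg, pv_tail_toList]
    have hdec : decide (1 < PySem.Str.len (pvSegR sentence wiN m)) = true := by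
      rw [decide_eq_true_eq, PySem.Str.len_eq, hseg, List.length_drop]
      exact_mod_cast (by omega : 1 < n - wiN)
    have hin : PySem.Str.isIn " " (pvSegR sentence wiN m) = false := by
      rw [← Bool.not_eq_true, pv_isIn_space_iff, hseg]
      exact htail_nsp
    have hbne : (pvSegR sentence wiN m != word) = true := by
      rw [bne_iff_ne]
      intro hw
      have := congrArg (fun (g : String) => g.toList.length) hw
      simp only [hseg, List.length_drop] at this
      omega
    rw [pvPR, hdec, hin, hbne, htl, hok]
    rfl
  rw [hfull, List.length_range'] at hlens
  have hBA : (List.range' (wiN + lw + 1) (pvTok sentence (wiN + lw))).filter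
      (fun (m : Nat) => gsNgOk ngrams (pvSegR sentence wiN m))
      = (List.range' (wiN + lw + 1) (n - (wiN + lw))).filter
          (fun (m : Nat) => pvPR sentence word ngrams wiN m) := by
    rw [hk]
    apply List.filter_congr
    intro m hm
    rw [List.mem_range'_1] at hm
    have hseg : (pvSegR sentence wiN m).toList = (sentence.toList.drop wiN).take (m - wiN) := by
      rw [pvSegR, pv_seg_toList]
    have hlen2 : (pvSegR sentence wiN m).toList.length = m - wiN := by
      rw [hseg, List.length_take, List.length_drop]
      omega
    have hdec : decide (1 < PySem.Str.len (pvSegR sentence wiN m)) = true := by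
      rw [decide_eq_true_eq, PySem.Str.len_eq, hlen2]
      exact_mod_cast (by omega : 1 < m - wiN)
    have hin : PySem.Str.isIn " " (pvSegR sentence wiN m) = false := by
      rw [← Bool.not_eq_true, pv_isIn_space_iff, hseg]
      intro hc
      exact htail_nsp (List.take_subset _ _ hc)
    have hbne : (pvSegR sentence wiN m != word) = true := by
      rw [bne_iff_ne]
      intro hw
      have := congrArg (fun (g : String) => g.toList.length) hw
      simp only [hlen2] at this
      omega
    rw [pvPR, hdec, hin, hbne]
    simp
  rw [hBA] at hlens
  omega

-- inside the left corner, B's left list strictly extends A's by the sentence-initial candidate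
theorem pv_lefts_diff (sentence word : String) (ngrams : List (String × Int)) (wiN : Nat)
    (hlw : 2 ≤ word.toList.length)
    (hpre : word.toList <+: sentence.toList.drop wiN)
    (hwn : wiN ≤ sentence.toList.length)
    (hpos : 1 ≤ wiN)
    (hpre_nsp : ' ' ∉ sentence.toList.take (wiN + word.toList.length))
    (hok : gsNgOk ngrams (PySem.Str.slice sentence none (some ((wiN + word.toList.length : Nat) : Int))) = true) :
    (PySem.List.pyRange 1 ((wiN : Nat) : Int) 1).foldl
        (gsLeftStep sentence word ngrams ((wiN : Nat) : Int)) []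
      ≠ (((List.range' (wiN - pvTokRev sentence wiN) (pvTokRev sentence wiN)).reverse).filter
          (fun (m : Nat) => gsNgOk ngrams (pvSegL sentence (wiN + word.toList.length) m))).map
          (fun (m : Nat) => pvSegL sentence (wiN + word.toList.length) m) := by
  set n := sentence.toList.length with hn
  set lw := word.toList.length with hlwdef
  have hlwn : wiN + lw ≤ n := by
    have h1 := hpre.length_le
    rw [List.length_drop] at h1
    omega
  have hwsp : ' ' ∉ word.toList := by
    intro hc
    have htake : (sentence.toList.drop wiN).take lw = word.toList :=
      (List.prefix_iff_eq_take.mp hpre).symm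
    apply hpre_nsp
    rw [← htake] at hc
    obtain ⟨q, hq, hqs⟩ := pv_mem_take_drop.mp hc
    have hqt : (sentence.toList.take (wiN + lw))[wiN + q]? = some ' ' := by
      rw [List.getElem?_take, if_pos (by omega)]
      exact hqs
    exact List.mem_of_getElem? hqt
  -- the leftward run reaches index 0
  have hkL : pvTokRev sentence wiN = wiN := by
    apply pv_tw_len_eq
    · rw [List.length_reverse, List.length_take]
      omega
    · intro j hj
      have hgl : ((sentence.toList.take wiN).reverse)[j]? = sentence.toList[wiN - 1 - j]? :=
        pv_rev_take_get sentence.toList wiN j (by omega) hj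
      cases hg : sentence.toList[wiN - 1 - j]? with
      | none =>
        exfalso
        rw [List.getElem?_eq_none_iff] at hg
        omega
      | some c0 =>
        refine ⟨c0, by rw [hgl, hg], ?_⟩
        simp only [bne_iff_ne, ne_eq]
        intro hcs
        apply hpre_nsp
        subst hcs
        have hqt : (sentence.toList.take (wiN + lw))[wiN - 1 - j]? = some ' ' := by
          rw [List.getElem?_take, if_pos (by omega)]
          exact hg
        exact List.mem_of_getElem? hqt
    · left
      rw [List.length_reverse, List.length_take]
      omega
  rw [pv_A_lefts sentence word ngrams wiN hlw hpre hwn hwsp]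
  simp only [← hlwdef, hkL]
  rw [show max 1 (wiN - wiN) = 1 from by omega, Nat.sub_self]
  obtain ⟨w', rfl⟩ : ∃ w', wiN = w' + 1 := ⟨wiN - 1, by omega⟩
  rw [List.range'_succ, List.reverse_cons, List.filter_append, List.map_append]
  rw [show 0 + 1 = 1 from rfl, Nat.add_sub_cancel]
  have hok0 : gsNgOk ngrams (pvSegL sentence (w' + 1 + lw) 0) = true := by
    rw [pv_segL_zero]
    exact hok
  intro heq
  have hlens := congrArg List.length heq
  rw [List.length_map, List.length_append, List.length_map, List.length_map,
    List.filter_singleton] at hlens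
  simp only [hok0] at hlens
  simp at hlens

theorem pv_tight : ∀ (words_list : List String) (sentence : String) (ngrams : List (String × Int)),
    D_get_superlap_py words_list sentence ngrams →
    get_superlap_py words_list sentence ngrams ≠ get_superlap_py_alt words_list sentence ngrams := by
  intro words_list sentence ngrams hD heq
  obtain ⟨w, hwmem, h2, hfind, hdisj⟩ := hD
  have hw2 : ¬ PySem.Str.len w < 2 := by omega
  rw [get_superlap_py, get_superlap_py_alt] at heq
  have hdicts := PySem.Dict.ext heq
  have hget := congrArg (fun (d : PySem.Dict String (List (String × List String))) => d.get? w) hdicts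
  simp only at hget
  rw [pv_lookupA sentence ngrams w hw2 words_list _ hwmem,
    pv_lookupB sentence ngrams w hw2 words_list _ hwmem] at hget
  have hv : pvAVal sentence ngrams w = altWordEntry sentence ngrams w := Option.some.inj hget
  set wiN := (PySem.Str.find sentence w).toNat with hwiN
  have hwicast : PySem.Str.find sentence w = ((wiN : Nat) : Int) := by omega
  have hfands := PySem.Chars.find_spec (s := sentence.toList) (sub := w.toList)
    (by rwa [PySem.Str.find_eq] at hfind)
  have hpre : w.toList <+: sentence.toList.drop wiN := by
    have h1 := hfands.1
    rwa [show (PySem.Chars.find sentence.toList w.toList).toNat = wiN from by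
      rw [← PySem.Str.find_eq]] at h1
  have hwn : wiN ≤ sentence.toList.length := by
    have h1 := PySem.Chars.find_le_length sentence.toList w.toList
    rw [← PySem.Str.find_eq] at h1
    omega
  have hlw : 2 ≤ w.toList.length := by
    rw [PySem.Str.len_eq] at h2
    omega
  have hlwn : wiN + w.toList.length ≤ sentence.toList.length := by
    have h1 := hpre.length_le
    rw [List.length_drop] at h1
    omega
  have hwe : ((wiN : Nat) : Int) + PySem.Str.len w = ((wiN + w.toList.length : Nat) : Int) := by
    rw [PySem.Str.len_eq]
    push_cast
    ring
  rw [pvAVal, if_pos hfind] at hv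
  simp only [altWordEntry] at hv
  rw [if_pos hfind, hwicast, hwe] at hv
  rcases hdisj with hD1 | hD2
  · -- right corner
    rw [hwicast] at hD1
    obtain ⟨hlt, hnsp, hpos⟩ := hD1
    have hokg : gsNgOk ngrams (PySem.Str.slice sentence (some ((wiN : Nat) : Int)) none) = true := by
      rw [gsNgOk, Bool.and_eq_true, decide_eq_true_eq]
      exact ⟨pv_any_of_lookup _ _ hpos, hpos⟩
    have htail_nsp : ' ' ∉ sentence.toList.drop wiN := by
      rw [← pv_tail_toList sentence wiN, ← pv_isIn_space_iff, hnsp]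
      exact Bool.false_ne_true
    have hmemn : ' ' ∉ w.toList := by
      intro hc
      have htake : (sentence.toList.drop wiN).take w.toList.length = w.toList :=
        (List.prefix_iff_eq_take.mp hpre).symm
      exact htail_nsp (by rw [← htake] at hc; exact List.take_subset _ _ hc)
    have hltN : wiN + w.toList.length < sentence.toList.length := by
      rw [PySem.Str.len_eq, PySem.Str.len_eq] at hlt
      omega
    have hok : gsNgOk ngrams (PySem.Str.slice sentence (some ((wiN : Nat) : Int)) none) = true := hokg
    rw [pv_find_span sentence w wiN (by omega) hpre hwn hmemn] at hv
    have e5 : ((wiN + w.toList.length : Nat) : Int) + 1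
        = ((wiN + w.toList.length + 1 : Nat) : Int) := by push_cast; ring
    have e6 : ((wiN + w.toList.length + pvTok sentence (wiN + w.toList.length) : Nat) : Int) + 1
        = ((wiN + w.toList.length + pvTok sentence (wiN + w.toList.length) + 1 : Nat) : Int) := by
      push_cast; ring
    simp only [e5, e6] at hv
    rw [pv_B_rights' sentence ngrams wiN (wiN + w.toList.length + 1)
        (wiN + w.toList.length + pvTok sentence (wiN + w.toList.length) + 1) (by omega),
      show wiN + w.toList.length + pvTok sentence (wiN + w.toList.length) + 1
        - (wiN + w.toList.length + 1) = pvTok sentence (wiN + w.toList.length) from by omega] at hv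
    have hrights := congrArg (fun (l : List (String × List String)) => l[1]?) hv
    simp only [List.getElem?_cons_succ, List.getElem?_cons_zero] at hrights
    have hr := congrArg Prod.snd (Option.some.inj hrights)
    simp only at hr
    rw [show PySem.Str.len sentence = ((sentence.toList.length : Nat) : Int) from
      PySem.Str.len_eq sentence] at hr
    exact pv_rights_diff sentence w ngrams wiN hlw hpre hwn hltN htail_nsp hok hr
  · -- left corner
    rw [hwicast, hwe] at hD2
    obtain ⟨hpos1, hnsp, hpos⟩ := hD2
    have hokg : gsNgOk ngrams (PySem.Str.slice sentence none (some ((wiN + w.toList.length : Nat) : Int))) = true := by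
      rw [gsNgOk, Bool.and_eq_true, decide_eq_true_eq]
      exact ⟨pv_any_of_lookup _ _ hpos, hpos⟩
    have hposN : 1 ≤ wiN := by omega
    have hpre_nsp : ' ' ∉ sentence.toList.take (wiN + w.toList.length) := by
      rw [← pv_head_toList sentence (wiN + w.toList.length), ← pv_isIn_space_iff, hnsp]
      exact Bool.false_ne_true
    have hmemn : ' ' ∉ w.toList := by
      intro hc
      have htake : (sentence.toList.drop wiN).take w.toList.length = w.toList :=
        (List.prefix_iff_eq_take.mp hpre).symm
      apply hpre_nsp
      rw [← htake] at hc
      obtain ⟨q, hq, hqs⟩ := pv_mem_take_drop.mp hc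
      have hqt : (sentence.toList.take (wiN + w.toList.length))[wiN + q]? = some ' ' := by
        rw [List.getElem?_take, if_pos (by omega)]
        exact hqs
      exact List.mem_of_getElem? hqt
    have hok : gsNgOk ngrams (PySem.Str.slice sentence none (some ((wiN + w.toList.length : Nat) : Int))) = true := hokg
    rw [pv_find_span sentence w wiN (by omega) hpre hwn hmemn] at hv
    simp only [] at hv
    rw [pv_B_lefts' sentence ngrams (wiN + w.toList.length) (wiN - pvTokRev sentence wiN) wiN
        (by have := pv_tokRev_le sentence wiN; omega),
      show wiN - (wiN - pvTokRev sentence wiN) = pvTokRev sentence wiN from by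
        have := pv_tokRev_le sentence wiN; omega] at hv
    have hlefts := congrArg (fun (l : List (String × List String)) => l[0]?) hv
    simp only [List.getElem?_cons_zero] at hlefts
    have hl := congrArg Prod.snd (Option.some.inj hlefts)
    simp only at hl
    exact pv_lefts_diff sentence w ngrams wiN hlw hpre hwn hposN hpre_nsp hok hl

-- ===== VERDICT (by name: the statement is the Claim_ definition above) =====
theorem get_superlap_py_spec : Claim_unchanged_get_superlap_py := by
  intro words sentence ngrams _ hD
  exact pv_main words sentence ngrams hD

theorem get_superlap_py_changed : Claim_changed_get_superlap_py := by
  unfold Claim_changed_get_superlap_py; decide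

theorem get_superlap_py_tight : Claim_exact_get_superlap_py := by
  intro words_list sentence ngrams _ hD
  exact pv_tight words_list sentence ngrams hD
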